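-- pv_equiv track=rewrite | github.com/JuyeolRyu/CodingTest | 백수/algorithm/etc/프로그래머스 월간챌린지.py | solution
-- ===== SOURCE A (Python) =====
-- from collections import deque
--
-- def solution(a, edges):
--     if sum(a) != 0:
--         return -1
--
--     dic = {}
--     for e in edges:
--         if e[0] in dic:
--             dic[e[0]].append(e[1])
--         else:
--             dic[e[0]] = [e[1]]
--
--         if e[1] in dic:
--             dic[e[1]].append(e[0])
--         else:
--             dic[e[1]] = [e[0]]
--     q = deque()
--     for d in dic:
--         if len(dic[d]) == 1:
--             q.append(d)
--
--     ans = 0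
--
--     while q:
--         cur = q.popleft()
--         if len(dic[cur]) == 1:
--             for edge in dic[cur]:
--                 a[edge] += a[cur]
--                 ans += abs(a[cur])
--                 q.append(edge)
--                 dic[edge].remove(cur)
--                 dic[cur].remove(edge)
--
--     return ans
-- ===== SOURCE B (Python) =====
-- def solution(a, edges):
--     if sum(a) != 0:
--         return -1
--     # Direct formula: every unit of weight that crosses an edge is one move, and
--     # the net amount that must cross edge (u, v) is the total weight of the side
--     # containing v.  So the answer is the sum over the edges of |weight of one side|.
--     n = len(a)
--     adj = [[] for _ in range(n)]
--     for e in edges: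
--         adj[e[0]].append(e[1])
--         adj[e[1]].append(e[0])
--     total = 0
--     for e in edges:
--         u, v = e[0], e[1]
--         # sum of the weights reachable from v while vertex u is blocked
--         seen = [False] * n
--         seen[u] = True
--         seen[v] = True
--         stack = [v]
--         s = 0
--         while stack:
--             x = stack.pop()
--             s += a[x]
--             for y in adj[x]:
--                 if not seen[y]:
--                     seen[y] = True
--                     stack.append(y)
--         total += abs(s)
--     return total
-- ===== Notes on version B (the rewrite author's own statement) =====
-- stated objective: alternative
-- what changed: B drops A's destructive leaf-peeling simulation (queue of degree-1 nodes, adjacency lists shrunk with list.remove, weights pushed to the surviving neighbour) and instead evaluates the answer's direct formula: each edge is crossed by exactly |total weight on one side of that edge| unit moves, so B builds a static adjacency array once and, per edge, sums the weights of the component reachable from one endpoint while the other endpoint is blocked.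
-- outside the precondition, e.g. on solution([1, -1, 0], [[0, 1], [1, 2], [2, 0]]): A returns 0, B returns 2; on solution([1, -1], [[0, -2]]): A returns 2, B returns 1
import Mathlib
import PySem

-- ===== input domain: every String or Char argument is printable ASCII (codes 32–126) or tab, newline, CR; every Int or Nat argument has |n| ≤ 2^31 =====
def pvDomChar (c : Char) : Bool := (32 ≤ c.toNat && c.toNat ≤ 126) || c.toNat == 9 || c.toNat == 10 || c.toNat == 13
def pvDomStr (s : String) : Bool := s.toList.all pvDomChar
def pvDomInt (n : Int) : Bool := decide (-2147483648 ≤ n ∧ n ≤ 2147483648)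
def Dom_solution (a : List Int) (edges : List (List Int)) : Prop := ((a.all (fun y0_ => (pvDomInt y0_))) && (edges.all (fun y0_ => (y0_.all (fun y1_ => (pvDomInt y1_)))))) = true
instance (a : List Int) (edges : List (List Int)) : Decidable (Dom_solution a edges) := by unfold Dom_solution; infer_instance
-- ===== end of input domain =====

-- B replaces A's destructive leaf-peeling simulation by the direct formula
-- 'answer = sum over the edges of |total weight on one side of the edge|'
-- (objective: alternative); A mutates the caller's list a in place, B does not —
-- the equivalence proved here is about the return value only.

-- ===== PORT A =====
-- build of the adjacency dict: 'if e[0] in dic: dic[e[0]].append(e[1]) else: dic[e[0]] = [e[1]]', then the same for e[1]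
def buildA (edges : List (List Int)) : PySem.Dict Int (List Int) :=
  edges.foldl (fun dic e =>
    let e0 := (PySem.List.pyGet? e 0).getD 0   -- e[0]; none = IndexError, excluded by Pre_
    let e1 := (PySem.List.pyGet? e 1).getD 0   -- e[1]; none = IndexError, excluded by Pre_
    let dic1 := if dic.contains e0 then dic.insert e0 ((dic.getD e0 []) ++ [e1]) else dic.insert e0 [e1]
    if dic1.contains e1 then dic1.insert e1 ((dic1.getD e1 []) ++ [e0]) else dic1.insert e1 [e0])
    PySem.Dict.empty

-- the 'while q:' loop; fuel only makes the recursion structural (the initial fuel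
-- q₀.length + 2*edges.length bounds the number of iterations: every iteration pops one
-- queue entry and a peel appends one entry while removing two adjacency entries)
def loopA : Nat → PySem.Dict Int (List Int) → List Int → List Int → Int → Int
  | 0, _, _, _, ans => ans
  | _ + 1, _, _, [], ans => ans
  | fuel + 1, dic, a, cur :: q, ans =>
    match dic.getD cur [] with      -- 'if len(dic[cur]) == 1: for edge in dic[cur]:' (a 1-element iteration)
    | [edge] =>
      let av := (PySem.List.pyGet? a cur).getD 0                                   -- a[cur]
      let a' := PySem.List.pySetD a edge ((PySem.List.pyGet? a edge).getD 0 + av)  -- a[edge] += a[cur]; out of range = IndexError, excluded by Pre_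
      let ans' := ans + |(PySem.List.pyGet? a' cur).getD 0|                        -- ans += abs(a[cur]) (read after the update: edge may alias cur's slot)
      let q' := q ++ [edge]
      let dic1 := match PySem.List.remove? (dic.getD edge []) cur with             -- dic[edge].remove(cur)
        | some l => dic.insert edge l
        | none => dic     -- Python would raise ValueError; unreachable under Pre_ (adjacency is symmetric)
      let dic2 := match PySem.List.remove? (dic1.getD cur []) edge with            -- dic[cur].remove(edge)
        | some l => dic1.insert cur l
        | none => dic1    -- unreachable likewise
      loopA fuel dic2 a' q' ans'
    | _ => loopA fuel dic a q ans

def solution (a : List Int) (edges : List (List Int)) : Int :=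
  if a.sum ≠ 0 then -1
  else
    let dic := buildA edges
    let q := dic.keys.filter (fun d => (dic.getD d []).length == 1)
    loopA (q.length + 2 * edges.length) dic a q 0

-- ===== PORT B =====
-- adj = [[] for _ in range(n)]; for e in edges: adj[e[0]].append(e[1]); adj[e[1]].append(e[0])
def buildAdjB (n : Nat) (edges : List (List Int)) : List (List Int) :=
  edges.foldl (fun adj e =>
    let u := (PySem.List.pyGet? e 0).getD 0
    let v := (PySem.List.pyGet? e 1).getD 0
    let adj1 := PySem.List.pySetD adj u ((PySem.List.pyGet? adj u).getD [] ++ [v])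
    PySem.List.pySetD adj1 v ((PySem.List.pyGet? adj1 v).getD [] ++ [u]))
    (List.replicate n [])

-- the inner 'for y in adj[x]: if not seen[y]: seen[y] = True; stack.append(y)'
def pushNbrs (nbrs : List Int) (st : List Bool × List Int) : List Bool × List Int :=
  nbrs.foldl (fun p y =>
    if (PySem.List.pyGet? p.1 y).getD true then p
    else (PySem.List.pySetD p.1 y true, p.2 ++ [y])) st

-- the 'while stack:' DFS; python pops/pushes at the END of its list, the port keeps the
-- stack top at the HEAD (pushes are prepended in reverse); fuel 2*n+1 bounds the number
-- of iterations (each iteration pops one entry and every push marks an unseen cell)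
def dfsB : Nat → List (List Int) → List Int → List Bool → List Int → Int → Int
  | 0, _, _, _, _, s => s
  | _ + 1, _, _, _, [], s => s
  | fuel + 1, adj, a, seen, x :: rest, s =>
    let s' := s + (PySem.List.pyGet? a x).getD 0                     -- s += a[x]
    let nbrs := (PySem.List.pyGet? adj x).getD []                    -- adj[x]
    let sp := pushNbrs nbrs (seen, [])
    dfsB fuel adj a sp.1 (sp.2.reverse ++ rest) s'

def solution_alt (a : List Int) (edges : List (List Int)) : Int :=
  if a.sum ≠ 0 then -1
  else
    let n := a.length
    let adj := buildAdjB n edges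
    edges.foldl (fun total e =>
      let u := (PySem.List.pyGet? e 0).getD 0
      let v := (PySem.List.pyGet? e 1).getD 0
      let seen := PySem.List.pySetD (PySem.List.pySetD (List.replicate n false) u true) v true
      total + |dfsB (2 * n + 1) adj a seen [v] 0|) 0

-- ===== PRECONDITION & SPEC =====
def pvE0 (e : List Int) : Int := (PySem.List.pyGet? e 0).getD 0
def pvE1 (e : List Int) : Int := (PySem.List.pyGet? e 1).getD 0

-- standard reachability closure of {0} under the edge list (a fixed-point computation on
-- the INPUT, used only to state connectivity; it is not either port's algorithm)
def reachStep (edges : List (List Int)) (s : List Int) : List Int :=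
  edges.foldl (fun s e =>
    let s1 := if pvE0 e ∈ s ∧ pvE1 e ∉ s then s ++ [pvE1 e] else s
    if pvE1 e ∈ s1 ∧ pvE0 e ∉ s1 then s1 ++ [pvE0 e] else s1) s

def reachClose (edges : List (List Int)) : Nat → List Int
  | 0 => [0]
  | k + 1 => reachStep edges (reachClose edges k)

-- Pre_ restricts to the problem's natural domain: inputs whose weights do not balance
-- (both programs return -1 there), or a spanning tree over the nodes 0..len(a)-1, which
-- is what the contest problem guarantees.  A also RETURNS values on other inputs (graphs
-- with cycles, node ids that are negative or out of range), but what it returns there is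
-- an accident of how much of a non-tree its leaf-peeling consumes and of Python's
-- negative-index wraparound, and B's per-edge flow formula is just as defensible there.
def Pre_solution (a : List Int) (edges : List (List Int)) : Prop :=
  a.sum ≠ 0 ∨
  (edges.length + 1 = a.length ∧
   (∀ e ∈ edges, e.length = 2 ∧ 0 ≤ pvE0 e ∧ pvE0 e < (a.length : Int) ∧
      0 ≤ pvE1 e ∧ pvE1 e < (a.length : Int) ∧ pvE0 e ≠ pvE1 e) ∧
   (edges.map (fun e => if pvE0 e ≤ pvE1 e then (pvE0 e, pvE1 e) else (pvE1 e, pvE0 e))).Nodup ∧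
   (∀ v ∈ List.range a.length, (v : Int) ∈ reachClose edges edges.length))
instance (a : List Int) (edges : List (List Int)) : Decidable (Pre_solution a edges) := by
  unfold Pre_solution; infer_instance
def pvWitness_solution : List Int × List (List Int) := ([1, -1], [[0, 1]])

def Spec_solution (a : List Int) (edges : List (List Int)) (out : Int) : Prop := out = solution_alt a edges
instance (a : List Int) (edges : List (List Int)) (out : Int) : Decidable (Spec_solution a edges out) := by unfold Spec_solution; infer_instance

-- ===== CLAIM (what is proved, stated in full; the proofs are below) =====
def Claim_equal_solution : Prop := ∀ (a : List Int) (edges : List (List Int)), Dom_solution a edges → Pre_solution a edges → Spec_solution a edges (solution a edges)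

-- ===== LEMMAS AND PROOFS =====

-- shorthand for Python's a[i] read (as both ports read it)
def listGet (a : List Int) (i : Int) : Int := (PySem.List.pyGet? a i).getD 0

def seenAt (seen : List Bool) (i : Int) : Bool := (PySem.List.pyGet? seen i).getD true

def Adj (dic : PySem.Dict Int (List Int)) (x y : Int) : Prop := y ∈ dic.getD x []

-- bounded-step reachability (ok filters the vertices a walk may ENTER) and its closure
def RK (dic : PySem.Dict Int (List Int)) (ok : Int → Prop) : Nat → Int → Int → Prop
  | 0, x, y => y = x
  | k + 1, x, y => RK dic ok k x y ∨ ∃ z, RK dic ok k x z ∧ Adj dic z y ∧ ok y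

def Reach (dic : PySem.Dict Int (List Int)) (ok : Int → Prop) (x y : Int) : Prop :=
  ∃ k, RK dic ok k x y

-- {0, 1, …, n-1} as a Finset of Int
def intRange (n : Nat) : Finset Int :=
  (Finset.range n).map ⟨fun (i : Nat) => (i : Int), fun a b h => by simpa using h⟩

-- classical indicator
noncomputable def ind (P : Prop) (v : Int) : Int :=
  letI := Classical.propDecidable P
  if P then v else 0

-- the signed weight of the side of edge (u,v) that contains v: everything reachable
-- from v while vertex u is blocked (a proof-side notion; noncomputable, classical)
noncomputable def sideSum (dic : PySem.Dict Int (List Int)) (u v : Int) (a : List Int) : Int :=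
  ∑ x ∈ intRange a.length, ind (Reach dic (fun z => z ≠ u) v x) (listGet a x)

-- the potential: over every ORDERED adjacency entry (u,v), the absolute side weight
noncomputable def phi (dic : PySem.Dict Int (List Int)) (a : List Int) : Int :=
  (dic.keys.map (fun u => ((dic.getD u []).map (fun v => |sideSum dic u v a|)).sum)).sum

-- doubled edge count of the dict
def E2 (dic : PySem.Dict Int (List Int)) : Int :=
  (dic.keys.map (fun u => ((dic.getD u []).length : Int))).sum

def liveCount (dic : PySem.Dict Int (List Int)) : Nat :=
  (dic.keys.filter (fun u => !(dic.getD u [] == ([] : List Int)))).length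

-- the loop invariant of A's peeling process (n = a.length, fixed)
def InvA (n : Nat) (dic : PySem.Dict Int (List Int)) (a : List Int) (q : List Int) : Prop :=
  a.length = n ∧
  dic.keys.Nodup ∧
  (∀ u ∈ dic.keys, 0 ≤ u ∧ u < (n : Int)) ∧
  (∀ x y : Int, (dic.getD x []).count y = (dic.getD y []).count x) ∧
  (∀ x y : Int, (dic.getD x []).count y ≤ 1) ∧
  (∀ x : Int, x ∉ dic.getD x []) ∧
  (∀ x y : Int, dic.getD x [] ≠ [] → dic.getD y [] ≠ [] → Reach dic (fun _ => True) x y) ∧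
  (∑ x ∈ intRange n, ind (dic.getD x [] ≠ []) (listGet a x)) = 0 ∧
  (2 * (liveCount dic : Int) = E2 dic + 2 ∨ (E2 dic = 0 ∧ liveCount dic = 0)) ∧
  (∀ x : Int, (dic.getD x []).length = 1 → x ∈ q)

theorem mem_intRange {n : Nat} {x : Int} : x ∈ intRange n ↔ 0 ≤ x ∧ x < (n : Int) := by
  unfold intRange
  simp only [Finset.mem_map, Finset.mem_range, Function.Embedding.coeFn_mk]
  constructor
  · rintro ⟨i, hi, rfl⟩
    constructor
    · exact Int.natCast_nonneg i
    · exact_mod_cast hi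
  · rintro ⟨h0, hn⟩
    refine ⟨x.toNat, by omega, by omega⟩

theorem listGet_nonneg_eq (a : List Int) (i : Nat) : listGet a (i : Int) = a.getD i 0 := by
  simp [listGet, PySem.List.pyGet?_natCast, List.getD]

theorem sum_intRange_listGet (a : List Int) :
    (∑ x ∈ intRange a.length, listGet a x) = a.sum := by
  unfold intRange
  rw [Finset.sum_map]
  simp only [Function.Embedding.coeFn_mk]
  induction a with
  | nil => simp
  | cons h t ih =>
    rw [List.length_cons, Finset.sum_range_succ']
    simp only [listGet_nonneg_eq] at *
    simp only [List.getD_cons_succ, List.getD_cons_zero, List.sum_cons]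
    rw [ih]; ring

-- ---- basic Reach lemmas ----

theorem Reach.refl {dic ok x} : Reach dic ok x x := ⟨0, rfl⟩

theorem Reach.snoc {dic ok x z y} (h : Reach dic ok x z) (ha : Adj dic z y) (ho : ok y) :
    Reach dic ok x y := by
  obtain ⟨k, hk⟩ := h
  exact ⟨k + 1, Or.inr ⟨z, hk, ha, ho⟩⟩

theorem Reach.trans {dic ok x y z} (h1 : Reach dic ok x y) (h2 : Reach dic ok y z) :
    Reach dic ok x z := by
  obtain ⟨m, hm⟩ := h2
  induction m generalizing z with
  | zero => cases hm; exact h1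
  | succ m ih =>
    rcases hm with hm | ⟨w, hw, ha, ho⟩
    · exact ih hm
    · exact (ih hw).snoc ha ho

theorem Reach_ok {dic ok x y} (h : Reach dic ok x y) : y = x ∨ ok y := by
  obtain ⟨k, hk⟩ := h
  induction k with
  | zero => exact Or.inl hk
  | succ k ih =>
    rcases hk with hk | ⟨z, _, _, ho⟩
    · exact ih hk
    · exact Or.inr ho

theorem Reach_blocked_ne {dic u v y} (h : Reach dic (fun z => z ≠ u) v y) (hvu : v ≠ u) :
    y ≠ u := by
  rcases Reach_ok h with rfl | h'
  · exact hvu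
  · exact h'

-- the last step of a non-trivial walk
theorem Reach_tail {dic ok x y} (h : Reach dic ok x y) (hne : y ≠ x) :
    ∃ z, Reach dic ok x z ∧ Adj dic z y ∧ ok y := by
  obtain ⟨k, hk⟩ := h
  induction k with
  | zero => exact absurd hk hne
  | succ k ih =>
    rcases hk with hk | ⟨z, hz, ha, ho⟩
    · exact ih hk
    · exact ⟨z, ⟨k, hz⟩, ha, ho⟩

-- endpoints of a walk are live or the start
theorem Reach_live {dic ok x y} (hsym : ∀ x y : Int, (dic.getD x []).count y = (dic.getD y []).count x)
    (h : Reach dic ok x y) : y = x ∨ dic.getD y [] ≠ [] := by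
  rcases eq_or_ne y x with rfl | hne
  · exact Or.inl rfl
  · obtain ⟨z, _, ha, _⟩ := Reach_tail h hne
    right
    intro hemp
    have h1 : 0 < (dic.getD z []).count y := List.count_pos_iff.mpr ha
    rw [hsym z y, hemp] at h1
    simp at h1

-- ---- the peeled dictionary and walk surgery ----

-- the state of A's adjacency dict after peeling leaf cur into its neighbour p
def peelDict (dic : PySem.Dict Int (List Int)) (cur p : Int) : PySem.Dict Int (List Int) :=
  (dic.insert p ((dic.getD p []).erase cur)).insert cur []

theorem peel_getD (dic : PySem.Dict Int (List Int)) (cur p x : Int) (_hpc : p ≠ cur) :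
    (peelDict dic cur p).getD x [] =
      if x = cur then [] else if x = p then (dic.getD p []).erase cur else dic.getD x [] := by
  unfold peelDict
  rw [PySem.Dict.getD_insert, PySem.Dict.getD_insert]

theorem count_p_cur (dic : PySem.Dict Int (List Int)) (cur p : Int)
    (hsym : ∀ x y : Int, (dic.getD x []).count y = (dic.getD y []).count x)
    (hl : dic.getD cur [] = [p]) : (dic.getD p []).count cur = 1 := by
  rw [hsym p cur, hl]; simp

theorem mem_p_cur (dic : PySem.Dict Int (List Int)) (cur p : Int)
    (hsym : ∀ x y : Int, (dic.getD x []).count y = (dic.getD y []).count x)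
    (hl : dic.getD cur [] = [p]) : cur ∈ dic.getD p [] := by
  have := count_p_cur dic cur p hsym hl
  exact List.count_pos_iff.mp (by omega)

-- in dic, the only in-neighbour of cur is p
theorem adj_into_cur (dic : PySem.Dict Int (List Int)) (cur p z : Int)
    (hsym : ∀ x y : Int, (dic.getD x []).count y = (dic.getD y []).count x)
    (hl : dic.getD cur [] = [p]) (h : Adj dic z cur) : z = p := by
  have h1 : 0 < (dic.getD z []).count cur := List.count_pos_iff.mpr h
  rw [hsym z cur, hl] at h1
  have := List.count_pos_iff.mp h1
  simpa using this

-- cur has no in-edges at all in the peeled dict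
theorem peel_no_in (dic : PySem.Dict Int (List Int)) (cur p x : Int)
    (hsym : ∀ x y : Int, (dic.getD x []).count y = (dic.getD y []).count x)
    (hl : dic.getD cur [] = [p]) (hpc : p ≠ cur) :
    cur ∉ (peelDict dic cur p).getD x [] := by
  rw [peel_getD dic cur p x hpc]
  by_cases h1 : x = cur
  · simp [h1]
  · by_cases h2 : x = p
    · subst h2
      rw [if_neg h1, if_pos rfl]
      intro hmem
      have hc := List.count_pos_iff.mpr hmem
      rw [List.count_erase_self, count_p_cur dic cur x hsym hl] at hc
      omega
    · simp only [if_neg h1, if_neg h2]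
      intro hmem
      have h3 : 0 < (dic.getD x []).count cur := List.count_pos_iff.mpr hmem
      rw [hsym x cur, hl] at h3
      have := List.count_pos_iff.mp h3
      simp at this
      exact h2 this

theorem peel_adj_sub (dic : PySem.Dict Int (List Int)) (cur p x y : Int) (hpc : p ≠ cur)
    (h : Adj (peelDict dic cur p) x y) : Adj dic x y := by
  rw [Adj, peel_getD dic cur p x hpc] at h
  by_cases h1 : x = cur
  · simp [h1] at h
  · by_cases h2 : x = p
    · subst h2
      rw [if_neg h1, if_pos rfl] at h
      exact List.mem_of_mem_erase h
    · rwa [if_neg h1, if_neg h2] at h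

theorem peel_reach_sub (dic : PySem.Dict Int (List Int)) (cur p : Int) (ok : Int → Prop)
    (hpc : p ≠ cur) {x y : Int} (h : Reach (peelDict dic cur p) ok x y) : Reach dic ok x y := by
  obtain ⟨k, hk⟩ := h
  induction k generalizing y with
  | zero => cases hk; exact Reach.refl
  | succ k ih =>
    rcases hk with hk | ⟨z, hz, ha, ho⟩
    · exact ih hk
    · exact (ih hz).snoc (peel_adj_sub dic cur p z y hpc ha) ho

theorem peel_reach_ne_cur (dic : PySem.Dict Int (List Int)) (cur p : Int) (ok : Int → Prop)
    (hsym : ∀ x y : Int, (dic.getD x []).count y = (dic.getD y []).count x)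
    (hl : dic.getD cur [] = [p]) (hpc : p ≠ cur) {x y : Int} (hx : x ≠ cur)
    (h : Reach (peelDict dic cur p) ok x y) : y ≠ cur := by
  rintro rfl
  obtain ⟨z, _, ha, _⟩ := Reach_tail h (Ne.symm hx)
  exact peel_no_in dic y p z hsym hl hpc ha

-- extraction: a walk into cur ends with the step p → cur
theorem rk_into_cur (dic : PySem.Dict Int (List Int)) (cur p : Int) (ok : Int → Prop)
    (hsym : ∀ x y : Int, (dic.getD x []).count y = (dic.getD y []).count x)
    (hl : dic.getD cur [] = [p]) {x : Int} (hx : x ≠ cur) :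
    ∀ k, RK dic ok k x cur → ∃ j, j < k ∧ RK dic ok j x p := by
  intro k
  induction k with
  | zero => intro h; exact absurd h.symm hx
  | succ k ih =>
    intro h
    rcases h with h | ⟨z, hz, ha, _⟩
    · obtain ⟨j, hj, h'⟩ := ih h
      exact ⟨j, by omega, h'⟩
    · have hzp : z = p := adj_into_cur dic cur p z hsym hl ha
      subst hzp
      exact ⟨k, by omega, hz⟩

-- backward surgery: a walk in dic between vertices other than cur survives the peel
theorem peel_reach_back (dic : PySem.Dict Int (List Int)) (cur p : Int) (ok : Int → Prop)
    (hsym : ∀ x y : Int, (dic.getD x []).count y = (dic.getD y []).count x)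
    (hl : dic.getD cur [] = [p]) (hpc : p ≠ cur) {x : Int} (hx : x ≠ cur) :
    ∀ k, ∀ y, RK dic ok k x y → y ≠ cur → Reach (peelDict dic cur p) ok x y := by
  intro k
  induction k using Nat.strong_induction_on with
  | _ k ih =>
    match k with
    | 0 =>
      intro y h _
      cases h; exact Reach.refl
    | Nat.succ k =>
      intro y h hy
      rcases h with h | ⟨z, hz, ha, ho⟩
      · exact ih k (by omega) y h hy
      · by_cases hzc : z = cur
        · rw [hzc] at hz ha
          have hyp : y = p := by
            have h2 := ha
            rw [Adj, hl] at h2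
            simpa using h2
          obtain ⟨j, hj, hjp⟩ := rk_into_cur dic cur p ok hsym hl hx k hz
          rw [hyp]
          exact ih j (by omega) p hjp hpc
        · have hz₂ := ih k (by omega) z hz hzc
          refine hz₂.snoc ?_ ho
          rw [Adj, peel_getD dic cur p z hpc, if_neg hzc]
          by_cases hzp : z = p
          · subst hzp
            rw [if_pos rfl]
            exact (List.mem_erase_of_ne hy).mpr ha
          · rw [if_neg hzp]
            exact ha

-- the two directions of the surgery, packaged
theorem peel_reach_iff (dic : PySem.Dict Int (List Int)) (cur p : Int) (ok : Int → Prop)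
    (hsym : ∀ x y : Int, (dic.getD x []).count y = (dic.getD y []).count x)
    (hl : dic.getD cur [] = [p]) (hpc : p ≠ cur) {x y : Int} (hx : x ≠ cur) :
    Reach (peelDict dic cur p) ok x y ↔ Reach dic ok x y ∧ y ≠ cur := by
  constructor
  · intro h
    exact ⟨peel_reach_sub dic cur p ok hpc h,
           peel_reach_ne_cur dic cur p ok hsym hl hpc hx h⟩
  · rintro ⟨⟨k, hk⟩, hy⟩
    exact peel_reach_back dic cur p ok hsym hl hpc hx k y hk hy

-- ---- indicator lemmas ----

theorem ind_pos {P : Prop} {v : Int} (h : P) : ind P v = v := by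
  unfold ind
  exact if_pos h

theorem ind_neg {P : Prop} {v : Int} (h : ¬P) : ind P v = 0 := by
  unfold ind
  exact if_neg h

theorem ind_congr {P Q : Prop} {v w : Int} (h : P ↔ Q) (hv : v = w) : ind P v = ind Q w := by
  by_cases hP : P
  · rw [ind_pos hP, ind_pos (h.mp hP), hv]
  · rw [ind_neg hP, ind_neg (fun hq => hP (h.mpr hq))]

-- ---- more walk lemmas ----

theorem Adj_symm {dic : PySem.Dict Int (List Int)}
    (hsym : ∀ x y : Int, (dic.getD x []).count y = (dic.getD y []).count x)
    {x y : Int} (h : Adj dic x y) : Adj dic y x := by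
  have h1 : 0 < (dic.getD x []).count y := List.count_pos_iff.mpr h
  rw [hsym x y] at h1
  exact List.count_pos_iff.mp h1

theorem Reach_rev {dic : PySem.Dict Int (List Int)}
    (hsym : ∀ x y : Int, (dic.getD x []).count y = (dic.getD y []).count x)
    {x y : Int} (h : Reach dic (fun _ => True) x y) : Reach dic (fun _ => True) y x := by
  obtain ⟨k, hk⟩ := h
  induction k generalizing y with
  | zero => cases hk; exact Reach.refl
  | succ k ih =>
    rcases hk with hk | ⟨z, hz, ha, _⟩
    · exact ih hk
    · exact Reach.trans (Reach.snoc Reach.refl (Adj_symm hsym ha) trivial) (ih hz)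

theorem live_mem_keys {dic : PySem.Dict Int (List Int)} {x : Int}
    (h : dic.getD x [] ≠ []) : x ∈ dic.keys := by
  by_contra hmem
  have hc : dic.contains x = false := by
    rcases hb : dic.contains x with _ | _
    · rfl
    · exact absurd ((PySem.Dict.contains_iff_mem_keys dic x).mp hb) hmem
  exact h (PySem.Dict.getD_of_not_contains dic [] hc)

-- a walk from cur avoiding its unique neighbour p never leaves cur
theorem reach_from_leaf {dic : PySem.Dict Int (List Int)} {cur p : Int}
    (hl : dic.getD cur [] = [p]) {y : Int}
    (h : Reach dic (fun z => z ≠ p) cur y) : y = cur := by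
  obtain ⟨k, hk⟩ := h
  induction k generalizing y with
  | zero => exact hk
  | succ k ih =>
    rcases hk with hk | ⟨z, hz, ha, ho⟩
    · exact ih hk
    · have hzc : z = cur := ih hz
      rw [hzc, Adj, hl] at ha
      simp at ha
      exact absurd ha ho

-- the side of cur across the peeled edge is reached iff p is
theorem reach_cur_iff {dic : PySem.Dict Int (List Int)} {cur p : Int}
    (hsym : ∀ x y : Int, (dic.getD x []).count y = (dic.getD y []).count x)
    (hl : dic.getD cur [] = [p]) {u v : Int} (hvc : v ≠ cur) (hcu : cur ≠ u) :
    Reach dic (fun z => z ≠ u) v cur ↔ Reach dic (fun z => z ≠ u) v p := by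
  constructor
  · intro h
    obtain ⟨z, hz, ha, _⟩ := Reach_tail h (Ne.symm hvc)
    have hzp : z = p := adj_into_cur dic cur p z hsym hl ha
    rwa [hzp] at hz
  · intro h
    exact h.snoc (mem_p_cur dic cur p hsym hl) hcu

-- every walk in the peeled dict avoids cur as an intermediate target
theorem peel_reach_avoid {dic : PySem.Dict Int (List Int)} {cur p : Int}
    (hsym : ∀ x y : Int, (dic.getD x []).count y = (dic.getD y []).count x)
    (hl : dic.getD cur [] = [p]) (hpc : p ≠ cur) {x y : Int}
    (h : Reach (peelDict dic cur p) (fun _ => True) x y) :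
    Reach (peelDict dic cur p) (fun z => z ≠ cur) x y := by
  obtain ⟨k, hk⟩ := h
  induction k generalizing y with
  | zero => cases hk; exact Reach.refl
  | succ k ih =>
    rcases hk with hk | ⟨z, hz, ha, _⟩
    · exact ih hk
    · refine (ih hz).snoc ha ?_
      intro hyc
      rw [hyc] at ha
      exact peel_no_in dic cur p z hsym hl hpc ha

-- with cur's edge gone, p still reaches every other live vertex without cur
theorem reach_all_from_p {dic : PySem.Dict Int (List Int)} {cur p : Int}
    (hsym : ∀ x y : Int, (dic.getD x []).count y = (dic.getD y []).count x)
    (hconn : ∀ x y : Int, dic.getD x [] ≠ [] → dic.getD y [] ≠ [] →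
       Reach dic (fun _ => True) x y)
    (hl : dic.getD cur [] = [p]) (hpc : p ≠ cur) {y : Int}
    (hy : dic.getD y [] ≠ []) (hyc : y ≠ cur) :
    Reach dic (fun z => z ≠ cur) p y := by
  have hplive : dic.getD p [] ≠ [] :=
    List.ne_nil_of_mem (mem_p_cur dic cur p hsym hl)
  obtain ⟨k, hk⟩ := hconn p y hplive hy
  have h₂ : Reach (peelDict dic cur p) (fun _ => True) p y :=
    peel_reach_back dic cur p (fun _ => True) hsym hl hpc hpc k y hk hyc
  exact peel_reach_sub dic cur p (fun z => z ≠ cur) hpc (peel_reach_avoid hsym hl hpc h₂)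

-- a reachable vertex is the start or lies inside the key range
theorem reach_range {dic : PySem.Dict Int (List Int)} {n : Nat}
    (hsym : ∀ x y : Int, (dic.getD x []).count y = (dic.getD y []).count x)
    (hkr : ∀ u ∈ dic.keys, 0 ≤ u ∧ u < (n : Int)) {ok : Int → Prop} {v y : Int}
    (h : Reach dic ok v y) : y = v ∨ (0 ≤ y ∧ y < (n : Int)) := by
  rcases Reach_live hsym h with h' | h'
  · exact Or.inl h'
  · exact Or.inr (hkr y (live_mem_keys h'))

-- ---- reads of the mutated weight list ----

theorem listGet_pySetD_self (a : List Int) (p : Int) (w : Int)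
    (h0 : 0 ≤ p) (hn : p < (a.length : Int)) :
    listGet (PySem.List.pySetD a p w) p = w := by
  rw [PySem.List.pySetD_of_nonneg a w h0]
  unfold listGet
  have hp : p = ((p.toNat : Nat) : Int) := by omega
  rw [hp, PySem.List.pyGet?_natCast]
  simp only [Int.toNat_natCast]
  rw [List.getElem?_set_self (by omega)]
  rfl

theorem listGet_pySetD_ne (a : List Int) (p : Int) (w : Int) (x : Int)
    (hp0 : 0 ≤ p) (h0 : 0 ≤ x) (hxp : x ≠ p) :
    listGet (PySem.List.pySetD a p w) x = listGet a x := by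
  rw [PySem.List.pySetD_of_nonneg a w hp0]
  unfold listGet
  have hx : x = ((x.toNat : Nat) : Int) := by omega
  rw [hx, PySem.List.pyGet?_natCast, PySem.List.pyGet?_natCast]
  rw [List.getElem?_set_ne (by omega)]

-- ---- the three side-sum facts used by the peel step ----

-- surviving ordered edges keep their side weight across a peel
theorem side_peel (dic : PySem.Dict Int (List Int)) (cur p : Int) (a : List Int) (u v : Int)
    (hsym : ∀ x y : Int, (dic.getD x []).count y = (dic.getD y []).count x)
    (hl : dic.getD cur [] = [p]) (hpc : p ≠ cur)
    (hc0 : 0 ≤ cur) (hcn : cur < (a.length : Int))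
    (hp0 : 0 ≤ p) (hpn : p < (a.length : Int))
    (huc : u ≠ cur) (hvc : v ≠ cur) :
    sideSum (peelDict dic cur p) u v (PySem.List.pySetD a p (listGet a p + listGet a cur))
      = sideSum dic u v a := by
  have hlen : (PySem.List.pySetD a p (listGet a p + listGet a cur)).length = a.length :=
    PySem.List.length_pySetD a p _
  unfold sideSum
  rw [hlen]
  have hcm : cur ∈ intRange a.length := mem_intRange.mpr ⟨hc0, hcn⟩
  have hpm : p ∈ (intRange a.length).erase cur := Finset.mem_erase.mpr ⟨hpc, mem_intRange.mpr ⟨hp0, hpn⟩⟩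
  rw [← Finset.sum_erase_add _ _ hcm, ← Finset.sum_erase_add _ _ hcm,
      ← Finset.sum_erase_add _ _ hpm, ← Finset.sum_erase_add _ _ hpm]
  have hmain : ∀ x ∈ ((intRange a.length).erase cur).erase p,
      ind (Reach (peelDict dic cur p) (fun z => z ≠ u) v x)
          (listGet (PySem.List.pySetD a p (listGet a p + listGet a cur)) x)
        = ind (Reach dic (fun z => z ≠ u) v x) (listGet a x) := by
    intro x hx
    obtain ⟨hxp, hxc, hxm⟩ : x ≠ p ∧ x ≠ cur ∧ x ∈ intRange a.length := by
      obtain ⟨h1, h2⟩ := Finset.mem_erase.mp hx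
      obtain ⟨h3, h4⟩ := Finset.mem_erase.mp h2
      exact ⟨h1, h3, h4⟩
    refine ind_congr ?_ ?_
    · rw [peel_reach_iff dic cur p _ hsym hl hpc hvc]
      constructor
      · exact fun h => h.1
      · exact fun h => ⟨h, hxc⟩
    · exact listGet_pySetD_ne a p _ x hp0 (mem_intRange.mp hxm).1 hxp
  rw [Finset.sum_congr rfl hmain]
  have hcur0 : ind (Reach (peelDict dic cur p) (fun z => z ≠ u) v cur)
      (listGet (PySem.List.pySetD a p (listGet a p + listGet a cur)) cur) = 0 := by
    refine ind_neg ?_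
    intro h
    exact peel_reach_ne_cur dic cur p _ hsym hl hpc hvc h rfl
  rw [hcur0]
  have hpterm : ind (Reach (peelDict dic cur p) (fun z => z ≠ u) v p)
      (listGet (PySem.List.pySetD a p (listGet a p + listGet a cur)) p)
        = ind (Reach dic (fun z => z ≠ u) v p) (listGet a p)
          + ind (Reach dic (fun z => z ≠ u) v cur) (listGet a cur) := by
    rw [listGet_pySetD_self a p _ hp0 hpn]
    have hiff1 : Reach (peelDict dic cur p) (fun z => z ≠ u) v p
        ↔ Reach dic (fun z => z ≠ u) v p := by
      rw [peel_reach_iff dic cur p _ hsym hl hpc hvc]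
      exact ⟨fun h => h.1, fun h => ⟨h, hpc⟩⟩
    have hiff2 : Reach dic (fun z => z ≠ u) v cur ↔ Reach dic (fun z => z ≠ u) v p :=
      reach_cur_iff hsym hl hvc (Ne.symm huc)
    by_cases hP : Reach dic (fun z => z ≠ u) v p
    · rw [ind_pos (hiff1.mpr hP), ind_pos hP, ind_pos (hiff2.mpr hP)]
    · rw [ind_neg (fun h => hP (hiff1.mp h)), ind_neg hP,
          ind_neg (fun h => hP (hiff2.mp h))]
      ring
  rw [hpterm]
  ring

-- the peeled leaf's own side is exactly itself
theorem side_leaf (dic : PySem.Dict Int (List Int)) (cur p : Int) (a : List Int)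
    (hl : dic.getD cur [] = [p])
    (hc0 : 0 ≤ cur) (hcn : cur < (a.length : Int)) :
    sideSum dic p cur a = listGet a cur := by
  unfold sideSum
  have hcm : cur ∈ intRange a.length := mem_intRange.mpr ⟨hc0, hcn⟩
  rw [← Finset.sum_erase_add _ _ hcm]
  have h0 : ∀ x ∈ (intRange a.length).erase cur,
      ind (Reach dic (fun z => z ≠ p) cur x) (listGet a x) = 0 := by
    intro x hx
    refine ind_neg ?_
    intro h
    exact (Finset.mem_erase.mp hx).1 (reach_from_leaf hl h)
  rw [Finset.sum_congr rfl h0]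
  rw [ind_pos Reach.refl]
  simp

-- the far side of the peeled edge carries the complementary weight
theorem side_far (dic : PySem.Dict Int (List Int)) (cur p : Int) (a : List Int)
    (hsym : ∀ x y : Int, (dic.getD x []).count y = (dic.getD y []).count x)
    (hconn : ∀ x y : Int, dic.getD x [] ≠ [] → dic.getD y [] ≠ [] →
       Reach dic (fun _ => True) x y)
    (hl : dic.getD cur [] = [p]) (hpc : p ≠ cur)
    (hzsum : (∑ x ∈ intRange a.length, ind (dic.getD x [] ≠ []) (listGet a x)) = 0)
    (hc0 : 0 ≤ cur) (hcn : cur < (a.length : Int)) :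
    sideSum dic cur p a = - listGet a cur := by
  unfold sideSum
  have hcm : cur ∈ intRange a.length := mem_intRange.mpr ⟨hc0, hcn⟩
  have hplive : dic.getD p [] ≠ [] := List.ne_nil_of_mem (mem_p_cur dic cur p hsym hl)
  have hQ : ∀ x, Reach dic (fun z => z ≠ cur) p x ↔ (dic.getD x [] ≠ [] ∧ x ≠ cur) := by
    intro x
    constructor
    · intro h
      refine ⟨?_, Reach_blocked_ne h hpc⟩
      rcases Reach_live hsym h with rfl | h'
      · exact hplive
      · exact h'
    · rintro ⟨h1, h2⟩
      exact reach_all_from_p hsym hconn hl hpc h1 h2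
  have hstep : ∀ x ∈ (intRange a.length).erase cur,
      ind (Reach dic (fun z => z ≠ cur) p x) (listGet a x)
        = ind (dic.getD x [] ≠ []) (listGet a x) := by
    intro x hx
    refine ind_congr ?_ rfl
    rw [hQ x]
    have hxc := (Finset.mem_erase.mp hx).1
    exact ⟨fun h => h.1, fun h => ⟨h, hxc⟩⟩
  rw [← Finset.sum_erase_add _ _ hcm, Finset.sum_congr rfl hstep]
  have hcurQ : ind (Reach dic (fun z => z ≠ cur) p cur) (listGet a cur) = 0 := by
    refine ind_neg ?_
    intro h
    exact ((hQ cur).mp h).2 rfl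
  rw [hcurQ]
  have hclive : dic.getD cur [] ≠ [] := by rw [hl]; simp
  rw [← Finset.sum_erase_add _ _ hcm, ind_pos hclive] at hzsum
  omega

-- ---- list-sum bookkeeping helpers ----

theorem map_sum_one_point (l : List Int) (f g : Int → Int) (c : Int)
    (hnd : l.Nodup) (hc : c ∈ l) (hother : ∀ x ∈ l, x ≠ c → f x = g x) :
    (l.map f).sum = (l.map g).sum + (f c - g c) := by
  induction l with
  | nil => cases hc
  | cons h t ih =>
    rcases List.mem_cons.mp hc with rfl | hct
    · have ht : ∀ x ∈ t, f x = g x := by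
        intro x hx
        exact hother x (List.mem_cons_of_mem _ hx) (fun hxc => (List.nodup_cons.mp hnd).1 (hxc ▸ hx))
      simp only [List.map_cons, List.sum_cons]
      rw [List.map_congr_left ht]
      ring
    · have hh : f h = g h := hother h List.mem_cons_self
        (fun hhc => (List.nodup_cons.mp hnd).1 (hhc ▸ hct))
      simp only [List.map_cons, List.sum_cons]
      rw [ih (List.nodup_cons.mp hnd).2 hct
        (fun x hx hxc => hother x (List.mem_cons_of_mem _ hx) hxc), hh]
      ring

theorem map_sum_two_point (l : List Int) (f g : Int → Int) (p c : Int)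
    (hnd : l.Nodup) (hp : p ∈ l) (hc : c ∈ l) (hpc : p ≠ c)
    (hother : ∀ x ∈ l, x ≠ p → x ≠ c → f x = g x) :
    (l.map f).sum = (l.map g).sum + (f p - g p) + (f c - g c) := by
  have h1 : (l.map f).sum = (l.map (fun x => if x = p then g x else f x)).sum + (f p - g p) := by
    have := map_sum_one_point l f (fun x => if x = p then g x else f x) p hnd hp
      (fun x _ hxp => by simp [hxp])
    rw [this]
    simp
  have h2 : (l.map (fun x => if x = p then g x else f x)).sum = (l.map g).sum + (f c - g c) := by
    have := map_sum_one_point l (fun x => if x = p then g x else f x) g c hnd hc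
      (fun x hx hxc => by
        by_cases hxp : x = p
        · simp [hxp]
        · simp [hxp]
          exact hother x hx hxp hxc)
    rw [this]
    simp [Ne.symm hpc]
  rw [h1, h2]
  ring

theorem map_sum_erase (l : List Int) (f : Int → Int) (c : Int) (hc : c ∈ l) :
    (l.map f).sum = ((l.erase c).map f).sum + f c := by
  induction l with
  | nil => cases hc
  | cons h t ih =>
    by_cases hhc : h = c
    · subst hhc
      rw [List.erase_cons_head]
      simp only [List.map_cons, List.sum_cons]
      ring
    · rw [List.erase_cons_tail (by simp [hhc])]
      simp only [List.map_cons, List.sum_cons]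
      rw [ih (List.mem_cons.mp hc |>.resolve_left (fun h' => hhc h'.symm))]
      ring

theorem filter_length_one_point (l : List Int) (f g : Int → Bool) (c : Int)
    (hnd : l.Nodup) (hc : c ∈ l) (hfc : f c = true) (hgc : g c = false)
    (hother : ∀ x ∈ l, x ≠ c → f x = g x) :
    (l.filter f).length = (l.filter g).length + 1 := by
  induction l with
  | nil => cases hc
  | cons h t ih =>
    rcases List.mem_cons.mp hc with rfl | hct
    · have ht : ∀ x ∈ t, f x = g x := by
        intro x hx
        exact hother x (List.mem_cons_of_mem _ hx) (fun hxc => (List.nodup_cons.mp hnd).1 (hxc ▸ hx))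
      rw [List.filter_cons, List.filter_cons, hfc, hgc]
      simp only [if_true, Bool.false_eq_true, if_false, List.length_cons]
      rw [List.filter_congr ht]
    · have hh : f h = g h := hother h List.mem_cons_self
        (fun hhc => (List.nodup_cons.mp hnd).1 (hhc ▸ hct))
      rw [List.filter_cons, List.filter_cons, ← hh]
      have := ih (List.nodup_cons.mp hnd).2 hct
        (fun x hx hxc => hother x (List.mem_cons_of_mem _ hx) hxc)
      by_cases hfh : f h = true
      · simp only [hfh, if_true, List.length_cons]
        omega
      · simp only [Bool.not_eq_true] at hfh
        simp only [hfh, Bool.false_eq_true, if_false]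
        omega

-- cur's only occurrence anywhere is in p's list
theorem count_cur_zero (dic : PySem.Dict Int (List Int)) (cur p : Int)
    (hsym : ∀ x y : Int, (dic.getD x []).count y = (dic.getD y []).count x)
    (hl : dic.getD cur [] = [p]) (u : Int) (hup : u ≠ p) : cur ∉ dic.getD u [] := by
  intro hmem
  have h1 : 0 < (dic.getD u []).count cur := List.count_pos_iff.mpr hmem
  rw [hsym u cur, hl] at h1
  have := List.count_pos_iff.mp h1
  simp at this
  exact hup this

-- ---- peel-step bookkeeping ----

theorem erase_singleton (l : List Int) (c : Int) (hc : c ∈ l) (h2 : l.erase c = []) :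
    l = [c] := by
  have h3 := List.length_erase_of_mem hc
  rw [h2] at h3
  simp at h3
  have h4 : l.length = 1 := by
    have := List.length_pos_of_mem hc
    omega
  obtain ⟨x, rfl⟩ := List.length_eq_one_iff.mp h4
  have hcx : c = x := by simpa using hc
  rw [← hcx]

theorem peelDict_keys (dic : PySem.Dict Int (List Int)) (cur p : Int)
    (hcur : dic.contains cur = true) (hp : dic.contains p = true) :
    (peelDict dic cur p).keys = dic.keys := by
  unfold peelDict
  rw [PySem.Dict.keys_insert_of_contains _ _ (by rw [PySem.Dict.contains_insert]; simp [hcur]),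
      PySem.Dict.keys_insert_of_contains _ _ hp]

-- E2 drops by exactly two at a peel
theorem E2_peel (dic : PySem.Dict Int (List Int)) (cur p : Int)
    (hsym : ∀ x y : Int, (dic.getD x []).count y = (dic.getD y []).count x)
    (hl : dic.getD cur [] = [p]) (hpc : p ≠ cur) (hnd : dic.keys.Nodup)
    (hcm : cur ∈ dic.keys) (hpm : p ∈ dic.keys) :
    E2 dic = E2 (peelDict dic cur p) + 2 := by
  unfold E2
  rw [peelDict_keys dic cur p ((PySem.Dict.contains_iff_mem_keys dic cur).mpr hcm)
      ((PySem.Dict.contains_iff_mem_keys dic p).mpr hpm)]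
  have hmem : cur ∈ dic.getD p [] := mem_p_cur dic cur p hsym hl
  have hplen := List.length_erase_of_mem hmem
  have hppos := List.length_pos_of_mem hmem
  rw [map_sum_two_point _ _ (fun u => (((peelDict dic cur p).getD u []).length : Int)) p cur
      hnd hpm hcm hpc (fun x _ hxp hxc => by
        show ((dic.getD x []).length : Int) = (((peelDict dic cur p).getD x []).length : Int)
        rw [peel_getD dic cur p x hpc, if_neg hxc, if_neg hxp])]
  rw [peel_getD dic cur p p hpc, if_neg hpc, if_pos rfl,
      peel_getD dic cur p cur hpc, if_pos rfl, hl]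
  simp only [List.length_nil, List.length_cons]
  rw [hplen]
  push_cast
  omega

-- in the degenerate two-vertex case everything is a live pair
theorem rk_pair (dic : PySem.Dict Int (List Int)) (cur p : Int)
    (hsym : ∀ x y : Int, (dic.getD x []).count y = (dic.getD y []).count x)
    (hl : dic.getD cur [] = [p]) (hpl : dic.getD p [] = [cur]) :
    ∀ k x t, RK dic (fun _ => True) k x t → (t = cur ∨ t = p) → (x = cur ∨ x = p) := by
  intro k
  induction k using Nat.strong_induction_on with
  | _ k ih =>
    match k with
    | 0 =>
      intro x t h ht
      cases h
      exact ht
    | Nat.succ k =>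
      intro x t h ht
      rcases h with h | ⟨z, hz, ha, _⟩
      · exact ih k (by omega) x t h ht
      · rcases ht with rfl | rfl
        · have hzp : z = p := adj_into_cur dic t p z hsym hl ha
          exact ih k (by omega) x z hz (Or.inr hzp)
        · have hzc : z = cur := adj_into_cur dic t cur z hsym hpl ha
          exact ih k (by omega) x z hz (Or.inl hzc)

theorem live_pair (dic : PySem.Dict Int (List Int)) (cur p : Int)
    (hsym : ∀ x y : Int, (dic.getD x []).count y = (dic.getD y []).count x)
    (hconn : ∀ x y : Int, dic.getD x [] ≠ [] → dic.getD y [] ≠ [] →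
       Reach dic (fun _ => True) x y)
    (hl : dic.getD cur [] = [p]) (hpl : dic.getD p [] = [cur]) :
    ∀ x, dic.getD x [] ≠ [] → x = cur ∨ x = p := by
  intro x hx
  have hplive : dic.getD p [] ≠ [] := by rw [hpl]; simp
  obtain ⟨k, hk⟩ := hconn x p hx hplive
  exact rk_pair dic cur p hsym hl hpl k x p hk (Or.inr rfl)

-- after peeling the last edge everything is dead
theorem peel_dead (dic : PySem.Dict Int (List Int)) (cur p : Int)
    (hsym : ∀ x y : Int, (dic.getD x []).count y = (dic.getD y []).count x)
    (hconn : ∀ x y : Int, dic.getD x [] ≠ [] → dic.getD y [] ≠ [] →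
       Reach dic (fun _ => True) x y)
    (hl : dic.getD cur [] = [p]) (hpc : p ≠ cur)
    (herase : (dic.getD p []).erase cur = []) :
    ∀ x, (peelDict dic cur p).getD x [] = [] := by
  have hpl : dic.getD p [] = [cur] :=
    erase_singleton _ _ (mem_p_cur dic cur p hsym hl) herase
  intro x
  rw [peel_getD dic cur p x hpc]
  by_cases h1 : x = cur
  · rw [if_pos h1]
  · rw [if_neg h1]
    by_cases h2 : x = p
    · rw [if_pos h2, herase]
    · rw [if_neg h2]
      by_contra hlive
      rcases live_pair dic cur p hsym hconn hl hpl x hlive with h | h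
      · exact h1 h
      · exact h2 h

-- the potential drops by exactly twice the moved weight at a peel
theorem phi_peel (dic : PySem.Dict Int (List Int)) (cur p : Int) (a : List Int)
    (hsym : ∀ x y : Int, (dic.getD x []).count y = (dic.getD y []).count x)
    (hconn : ∀ x y : Int, dic.getD x [] ≠ [] → dic.getD y [] ≠ [] →
       Reach dic (fun _ => True) x y)
    (hl : dic.getD cur [] = [p]) (hpc : p ≠ cur) (hnd : dic.keys.Nodup)
    (hzsum : (∑ x ∈ intRange a.length, ind (dic.getD x [] ≠ []) (listGet a x)) = 0)
    (hcm : cur ∈ dic.keys) (hpm : p ∈ dic.keys)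
    (hc0 : 0 ≤ cur) (hcn : cur < (a.length : Int))
    (hp0 : 0 ≤ p) (hpn : p < (a.length : Int)) :
    phi dic a = 2 * |listGet a cur|
      + phi (peelDict dic cur p) (PySem.List.pySetD a p (listGet a p + listGet a cur)) := by
  unfold phi
  rw [peelDict_keys dic cur p ((PySem.Dict.contains_iff_mem_keys dic cur).mpr hcm)
      ((PySem.Dict.contains_iff_mem_keys dic p).mpr hpm)]
  set a' := PySem.List.pySetD a p (listGet a p + listGet a cur) with ha'
  set f := fun u => ((dic.getD u []).map (fun v => |sideSum dic u v a|)).sum with hf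
  set g := fun u =>
    (((peelDict dic cur p).getD u []).map (fun v => |sideSum (peelDict dic cur p) u v a'|)).sum
    with hg
  have hother : ∀ x ∈ dic.keys, x ≠ p → x ≠ cur → f x = g x := by
    intro x _ hxp hxc
    rw [hf, hg]
    simp only
    rw [peel_getD dic cur p x hpc, if_neg hxc, if_neg hxp]
    refine congrArg List.sum (List.map_congr_left ?_)
    intro v hv
    have hvc : v ≠ cur := by
      intro hvc
      exact count_cur_zero dic cur p hsym hl x hxp (hvc ▸ hv)
    rw [side_peel dic cur p a x v hsym hl hpc hc0 hcn hp0 hpn hxc hvc]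
  rw [map_sum_two_point dic.keys f g p cur hnd hpm hcm hpc hother]
  have hmem : cur ∈ dic.getD p [] := mem_p_cur dic cur p hsym hl
  have hfp : f p = g p + |listGet a cur| := by
    rw [hf, hg]
    simp only
    rw [peel_getD dic cur p p hpc, if_neg hpc, if_pos rfl]
    rw [map_sum_erase _ _ cur hmem]
    have hrest : (((dic.getD p []).erase cur).map (fun v => |sideSum dic p v a|)).sum
        = (((dic.getD p []).erase cur).map
            (fun v => |sideSum (peelDict dic cur p) p v a'|)).sum := by
      refine congrArg List.sum (List.map_congr_left ?_)
      intro v hv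
      have hvc : v ≠ cur := by
        intro hvc
        have : (dic.getD p []).count cur = 1 := count_p_cur dic cur p hsym hl
        have h2 : cur ∈ (dic.getD p []).erase cur := hvc ▸ hv
        have h3 := List.count_pos_iff.mpr h2
        rw [List.count_erase_self, this] at h3
        omega
      rw [side_peel dic cur p a p v hsym hl hpc hc0 hcn hp0 hpn hpc hvc]
    rw [hrest, side_leaf dic cur p a hl hc0 hcn]
  have hfc : f cur = |listGet a cur| := by
    rw [hf]
    simp only
    rw [hl]
    simp only [List.map_cons, List.map_nil, List.sum_cons, List.sum_nil]
    rw [side_far dic cur p a hsym hconn hl hpc hzsum hc0 hcn]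
    rw [abs_neg]
    ring
  have hgc : g cur = 0 := by
    rw [hg]
    simp only
    rw [peel_getD dic cur p cur hpc, if_pos rfl]
    simp
  rw [hfp, hfc, hgc]
  ring

-- ---- invariant preservation over a peel ----

theorem count_erase_le (l : List Int) (y c : Int) : (l.erase c).count y ≤ l.count y := by
  by_cases hyc : y = c
  · subst hyc
    rw [List.count_erase_self]
    omega
  · rw [List.count_erase_of_ne hyc]

theorem peel_sym (dic : PySem.Dict Int (List Int)) (cur p : Int)
    (hsym : ∀ x y : Int, (dic.getD x []).count y = (dic.getD y []).count x)
    (hl : dic.getD cur [] = [p]) (hpc : p ≠ cur) :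
    ∀ x y : Int, ((peelDict dic cur p).getD x []).count y
      = ((peelDict dic cur p).getD y []).count x := by
  intro x y
  rw [peel_getD dic cur p x hpc, peel_getD dic cur p y hpc]
  have hcnt1 : (dic.getD p []).count cur = 1 := count_p_cur dic cur p hsym hl
  by_cases hxc : x = cur
  · rw [if_pos hxc]
    by_cases hyc : y = cur
    · rw [if_pos hyc]
      simp
    · rw [if_neg hyc]
      by_cases hyp : y = p
      · rw [if_pos hyp]
        simp only [List.count_nil]
        rw [hxc, List.count_erase_self, hcnt1]
      · rw [if_neg hyp]
        simp only [List.count_nil]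
        have h0 : List.count cur (dic.getD y []) = 0 := by
          rw [← hsym cur y, hl, List.count_eq_zero]
          simp [hyp]
        rw [hxc, h0]
  · rw [if_neg hxc]
    by_cases hyc : y = cur
    · rw [if_pos hyc]
      simp only [List.count_nil]
      by_cases hxp : x = p
      · rw [if_pos hxp, hyc, List.count_erase_self, hcnt1]
      · rw [if_neg hxp]
        have h0 : List.count cur (dic.getD x []) = 0 := by
          rw [← hsym cur x, hl, List.count_eq_zero]
          simp [hxp]
        rw [hyc, h0]
    · rw [if_neg hyc]
      by_cases hxp : x = p
      · rw [if_pos hxp]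
        by_cases hyp : y = p
        · rw [if_pos hyp, hxp, hyp]
        · rw [if_neg hyp, List.count_erase_of_ne hyc, hxp, hsym p y]
      · rw [if_neg hxp]
        by_cases hyp : y = p
        · rw [if_pos hyp, List.count_erase_of_ne hxc, hyp, hsym x p]
        · rw [if_neg hyp, hsym x y]

theorem peel_simple (dic : PySem.Dict Int (List Int)) (cur p : Int)
    (hsimple : ∀ x y : Int, (dic.getD x []).count y ≤ 1) (hpc : p ≠ cur) :
    ∀ x y : Int, ((peelDict dic cur p).getD x []).count y ≤ 1 := by
  intro x y
  rw [peel_getD dic cur p x hpc]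
  by_cases h1 : x = cur
  · rw [if_pos h1]
    simp
  · rw [if_neg h1]
    by_cases h2 : x = p
    · rw [if_pos h2]
      exact le_trans (count_erase_le _ y cur) (hsimple p y)
    · rw [if_neg h2]
      exact hsimple x y

theorem peel_noself (dic : PySem.Dict Int (List Int)) (cur p : Int)
    (hnoself : ∀ x : Int, x ∉ dic.getD x []) (hpc : p ≠ cur) :
    ∀ x : Int, x ∉ (peelDict dic cur p).getD x [] := by
  intro x
  rw [peel_getD dic cur p x hpc]
  by_cases h1 : x = cur
  · rw [if_pos h1]
    simp
  · rw [if_neg h1]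
    by_cases h2 : x = p
    · rw [if_pos h2]
      intro hmem
      have hx2 := List.mem_of_mem_erase hmem
      rw [h2] at hx2
      exact hnoself p hx2
    · rw [if_neg h2]
      exact hnoself x

theorem peel_live_sub (dic : PySem.Dict Int (List Int)) (cur p : Int)
    (hsym : ∀ x y : Int, (dic.getD x []).count y = (dic.getD y []).count x)
    (hl : dic.getD cur [] = [p]) (hpc : p ≠ cur) (x : Int)
    (hx : (peelDict dic cur p).getD x [] ≠ []) : dic.getD x [] ≠ [] ∧ x ≠ cur := by
  rw [peel_getD dic cur p x hpc] at hx
  by_cases h1 : x = cur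
  · rw [if_pos h1] at hx
    exact absurd rfl hx
  · rw [if_neg h1] at hx
    refine ⟨?_, h1⟩
    by_cases h2 : x = p
    · rw [if_pos h2] at hx
      rw [h2]
      exact List.ne_nil_of_mem (mem_p_cur dic cur p hsym hl)
    · rwa [if_neg h2] at hx

theorem peel_conn (dic : PySem.Dict Int (List Int)) (cur p : Int)
    (hsym : ∀ x y : Int, (dic.getD x []).count y = (dic.getD y []).count x)
    (hconn : ∀ x y : Int, dic.getD x [] ≠ [] → dic.getD y [] ≠ [] →
       Reach dic (fun _ => True) x y)
    (hl : dic.getD cur [] = [p]) (hpc : p ≠ cur) :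
    ∀ x y : Int, (peelDict dic cur p).getD x [] ≠ [] →
      (peelDict dic cur p).getD y [] ≠ [] →
      Reach (peelDict dic cur p) (fun _ => True) x y := by
  intro x y hx hy
  obtain ⟨hx', hxc⟩ := peel_live_sub dic cur p hsym hl hpc x hx
  obtain ⟨hy', hyc⟩ := peel_live_sub dic cur p hsym hl hpc y hy
  obtain ⟨k, hk⟩ := hconn x y hx' hy'
  exact peel_reach_back dic cur p (fun _ => True) hsym hl hpc hxc k y hk hyc

theorem zsum_peel_main (dic : PySem.Dict Int (List Int)) (cur p : Int) (a : List Int)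
    (hsym : ∀ x y : Int, (dic.getD x []).count y = (dic.getD y []).count x)
    (hl : dic.getD cur [] = [p]) (hpc : p ≠ cur)
    (herase : (dic.getD p []).erase cur ≠ [])
    (hzsum : (∑ x ∈ intRange a.length, ind (dic.getD x [] ≠ []) (listGet a x)) = 0)
    (hc0 : 0 ≤ cur) (hcn : cur < (a.length : Int))
    (hp0 : 0 ≤ p) (hpn : p < (a.length : Int)) :
    (∑ x ∈ intRange (PySem.List.pySetD a p (listGet a p + listGet a cur)).length,
       ind ((peelDict dic cur p).getD x [] ≠ [])
         (listGet (PySem.List.pySetD a p (listGet a p + listGet a cur)) x)) = 0 := by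
  rw [PySem.List.length_pySetD]
  have hcm : cur ∈ intRange a.length := mem_intRange.mpr ⟨hc0, hcn⟩
  have hpm : p ∈ (intRange a.length).erase cur :=
    Finset.mem_erase.mpr ⟨hpc, mem_intRange.mpr ⟨hp0, hpn⟩⟩
  rw [← Finset.sum_erase_add _ _ hcm, ← Finset.sum_erase_add _ _ hpm]
  rw [← Finset.sum_erase_add _ _ hcm, ← Finset.sum_erase_add _ _ hpm] at hzsum
  have hmain : ∀ x ∈ ((intRange a.length).erase cur).erase p,
      ind ((peelDict dic cur p).getD x [] ≠ [])
        (listGet (PySem.List.pySetD a p (listGet a p + listGet a cur)) x)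
      = ind (dic.getD x [] ≠ []) (listGet a x) := by
    intro x hx
    obtain ⟨hxp, hxc, hxm⟩ : x ≠ p ∧ x ≠ cur ∧ x ∈ intRange a.length := by
      obtain ⟨h1, h2⟩ := Finset.mem_erase.mp hx
      obtain ⟨h3, h4⟩ := Finset.mem_erase.mp h2
      exact ⟨h1, h3, h4⟩
    refine ind_congr ?_ (listGet_pySetD_ne a p _ x hp0 (mem_intRange.mp hxm).1 hxp)
    rw [peel_getD dic cur p x hpc, if_neg hxc, if_neg hxp]
  rw [Finset.sum_congr rfl hmain]
  have ht1 : ind ((peelDict dic cur p).getD p [] ≠ [])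
      (listGet (PySem.List.pySetD a p (listGet a p + listGet a cur)) p)
      = listGet a p + listGet a cur := by
    rw [listGet_pySetD_self a p _ hp0 hpn]
    refine ind_pos ?_
    rw [peel_getD dic cur p p hpc, if_neg hpc, if_pos rfl]
    exact herase
  have ht2 : ind ((peelDict dic cur p).getD cur [] ≠ [])
      (listGet (PySem.List.pySetD a p (listGet a p + listGet a cur)) cur) = 0 := by
    refine ind_neg ?_
    rw [peel_getD dic cur p cur hpc, if_pos rfl]
    simp
  rw [ht1, ht2]
  have hlivep : ind (dic.getD p [] ≠ []) (listGet a p) = listGet a p :=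
    ind_pos (List.ne_nil_of_mem (mem_p_cur dic cur p hsym hl))
  have hlivec : ind (dic.getD cur [] ≠ []) (listGet a cur) = listGet a cur := by
    refine ind_pos ?_
    rw [hl]
    simp
  rw [hlivep, hlivec] at hzsum
  omega

theorem liveCount_peel_main (dic : PySem.Dict Int (List Int)) (cur p : Int)
    (hsym : ∀ x y : Int, (dic.getD x []).count y = (dic.getD y []).count x)
    (hl : dic.getD cur [] = [p]) (hpc : p ≠ cur) (hnd : dic.keys.Nodup)
    (hcm : cur ∈ dic.keys) (hpm : p ∈ dic.keys)
    (herase : (dic.getD p []).erase cur ≠ []) :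
    liveCount dic = liveCount (peelDict dic cur p) + 1 := by
  unfold liveCount
  rw [peelDict_keys dic cur p ((PySem.Dict.contains_iff_mem_keys dic cur).mpr hcm)
      ((PySem.Dict.contains_iff_mem_keys dic p).mpr hpm)]
  refine filter_length_one_point dic.keys _ _ cur hnd hcm ?_ ?_ ?_
  · rw [hl]
    simp
  · rw [peel_getD dic cur p cur hpc, if_pos rfl]
    simp
  · intro x _ hxc
    rw [peel_getD dic cur p x hpc, if_neg hxc]
    by_cases hxp : x = p
    · rw [if_pos hxp, hxp]
      have h1 : dic.getD p [] ≠ [] := List.ne_nil_of_mem (mem_p_cur dic cur p hsym hl)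
      rw [beq_eq_false_iff_ne.mpr h1, beq_eq_false_iff_ne.mpr herase]
    · rw [if_neg hxp]

-- ---- assembled invariant preservation, and edge-count facts ----

theorem sum_map_nonneg (l : List Int) (f : Int → Int) (h : ∀ x ∈ l, 0 ≤ f x) :
    0 ≤ (l.map f).sum := by
  induction l with
  | nil => simp
  | cons x t ih =>
    simp only [List.map_cons, List.sum_cons]
    have := h x List.mem_cons_self
    have := ih (fun y hy => h y (List.mem_cons_of_mem _ hy))
    omega

theorem le_sum_map_of_mem (l : List Int) (f : Int → Int) (u : Int)
    (h0 : ∀ x ∈ l, 0 ≤ f x) (hu : u ∈ l) : f u ≤ (l.map f).sum := by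
  induction l with
  | nil => cases hu
  | cons x t ih =>
    simp only [List.map_cons, List.sum_cons]
    rcases List.mem_cons.mp hu with rfl | hut
    · have := sum_map_nonneg t f (fun y hy => h0 y (List.mem_cons_of_mem _ hy))
      omega
    · have h1 := ih (fun y hy => h0 y (List.mem_cons_of_mem _ hy)) hut
      have := h0 x List.mem_cons_self
      omega

theorem E2_nonneg (dic : PySem.Dict Int (List Int)) : 0 ≤ E2 dic := by
  unfold E2
  exact sum_map_nonneg _ _ (fun x _ => by positivity)

theorem E2_zero_dead (dic : PySem.Dict Int (List Int)) (h : E2 dic = 0) :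
    ∀ x : Int, dic.getD x [] = [] := by
  intro x
  by_contra hx
  have hxk : x ∈ dic.keys := live_mem_keys hx
  have h1 : ((dic.getD x []).length : Int) ≤ E2 dic :=
    le_sum_map_of_mem dic.keys _ x (fun y _ => by positivity) hxk
  have h2 : 0 < (dic.getD x []).length := List.length_pos_iff.mpr hx
  omega

theorem no_adj_of_E2_zero (dic : PySem.Dict Int (List Int)) (h : E2 dic = 0)
    (x y : Int) : ¬ Adj dic x y := by
  intro ha
  rw [Adj, E2_zero_dead dic h x] at ha
  cases ha

theorem phi_zero (dic : PySem.Dict Int (List Int)) (a : List Int) (h : E2 dic = 0) :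
    phi dic a = 0 := by
  unfold phi
  have h1 : ∀ u ∈ dic.keys,
      (((dic.getD u []).map (fun v => |sideSum dic u v a|)).sum) = (fun _ => (0:Int)) u := by
    intro u _
    rw [E2_zero_dead dic h u]
    simp
  rw [List.map_congr_left h1]
  simp

theorem two_liveCount_le_E2 (dic : PySem.Dict Int (List Int))
    (hnoleaf : ∀ x : Int, (dic.getD x []).length ≠ 1) :
    2 * (liveCount dic : Int) ≤ E2 dic := by
  unfold liveCount E2
  induction dic.keys with
  | nil => simp
  | cons u t ih =>
    rw [List.filter_cons, List.map_cons, List.sum_cons]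
    by_cases hlive : dic.getD u [] = []
    · have hb : (!(dic.getD u [] == ([] : List Int))) = false := by
        rw [hlive]; rfl
      rw [hb]
      simp only [Bool.false_eq_true, if_false]
      rw [hlive]
      simp only [List.length_nil]
      push_cast
      push_cast at ih
      omega
    · have hb : (!(dic.getD u [] == ([] : List Int))) = true := by
        rw [beq_eq_false_iff_ne.mpr hlive]; rfl
      rw [hb]
      simp only [if_true, List.length_cons]
      have hlen : 2 ≤ (dic.getD u []).length := by
        have h1 : (dic.getD u []).length ≠ 1 := hnoleaf u
        have h2 : 0 < (dic.getD u []).length := List.length_pos_iff.mpr hlive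
        omega
      push_cast
      push_cast at ih
      omega

theorem liveCount_pos (dic : PySem.Dict Int (List Int)) (cur : Int)
    (hlive : dic.getD cur [] ≠ []) : 0 < liveCount dic := by
  unfold liveCount
  refine List.length_pos_of_mem (l := dic.keys.filter _) (a := cur) ?_
  rw [List.mem_filter]
  exact ⟨live_mem_keys hlive, by rw [beq_eq_false_iff_ne.mpr hlive]; rfl⟩

-- the full invariant survives a peel
theorem peel_invA (n : Nat) (dic : PySem.Dict Int (List Int)) (a : List Int)
    (rest : List Int) (cur p : Int)
    (hInv : InvA n dic a (cur :: rest)) (hl : dic.getD cur [] = [p]) :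
    InvA n (peelDict dic cur p) (PySem.List.pySetD a p (listGet a p + listGet a cur))
      (rest ++ [p])
    ∧ phi dic a = 2 * |listGet a cur|
        + phi (peelDict dic cur p) (PySem.List.pySetD a p (listGet a p + listGet a cur))
    ∧ E2 dic = E2 (peelDict dic cur p) + 2
    ∧ p ≠ cur ∧ 0 ≤ cur ∧ cur < (n : Int) ∧ 0 ≤ p ∧ p < (n : Int) := by
  obtain ⟨hlen, hnd, hkr, hsym, hsimple, hnoself, hconn, hzsum, hcnt, hq⟩ := hInv
  have hclive : dic.getD cur [] ≠ [] := by rw [hl]; simp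
  have hplive : dic.getD p [] ≠ [] := List.ne_nil_of_mem (mem_p_cur dic cur p hsym hl)
  have hcm : cur ∈ dic.keys := live_mem_keys hclive
  have hpm : p ∈ dic.keys := live_mem_keys hplive
  have hpc : p ≠ cur := by
    intro h
    rw [h] at hl
    exact hnoself cur (hl ▸ List.mem_cons_self)
  obtain ⟨hc0, hcn⟩ := hkr cur hcm
  obtain ⟨hp0, hpn⟩ := hkr p hpm
  have hcn' : cur < (a.length : Int) := by rw [hlen]; exact hcn
  have hpn' : p < (a.length : Int) := by rw [hlen]; exact hpn
  have hkeys : (peelDict dic cur p).keys = dic.keys :=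
    peelDict_keys dic cur p ((PySem.Dict.contains_iff_mem_keys dic cur).mpr hcm)
      ((PySem.Dict.contains_iff_mem_keys dic p).mpr hpm)
  have hzsum' : (∑ x ∈ intRange a.length, ind (dic.getD x [] ≠ []) (listGet a x)) = 0 := by
    rw [hlen]; exact hzsum
  refine ⟨⟨?_, ?_, ?_, peel_sym dic cur p hsym hl hpc, peel_simple dic cur p hsimple hpc,
      peel_noself dic cur p hnoself hpc, peel_conn dic cur p hsym hconn hl hpc, ?_, ?_, ?_⟩,
      ?_, ?_, hpc, hc0, hcn, hp0, hpn⟩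
  · rw [PySem.List.length_pySetD]; exact hlen
  · rw [hkeys]; exact hnd
  · rw [hkeys]; exact hkr
  · -- the zero-sum invariant
    by_cases herase : (dic.getD p []).erase cur = []
    · have hdead := peel_dead dic cur p hsym hconn hl hpc herase
      rw [show n = (PySem.List.pySetD a p (listGet a p + listGet a cur)).length by
        rw [PySem.List.length_pySetD]; omega]
      refine Finset.sum_eq_zero ?_
      intro x _
      exact ind_neg (fun hne => hne (hdead x))
    · have := zsum_peel_main dic cur p a hsym hl hpc herase hzsum' hc0 hcn' hp0 hpn'
      rw [PySem.List.length_pySetD] at this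
      rw [show n = a.length from hlen.symm]
      rw [← PySem.List.length_pySetD a p (listGet a p + listGet a cur)] at this ⊢
      rw [PySem.List.length_pySetD] at this ⊢
      exact this
  · -- the live/edge count invariant
    by_cases herase : (dic.getD p []).erase cur = []
    · right
      have hdead := peel_dead dic cur p hsym hconn hl hpc herase
      constructor
      · unfold E2
        rw [hkeys]
        have h1 : ∀ u ∈ dic.keys,
            (((peelDict dic cur p).getD u []).length : Int) = (fun _ => (0:Int)) u := by
          intro u _
          rw [hdead u]
          simp
        rw [List.map_congr_left h1]
        simp
      · unfold liveCount
        rw [hkeys]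
        have h1 : dic.keys.filter (fun u => !((peelDict dic cur p).getD u [] == ([] : List Int))) = [] := by
          rw [List.filter_eq_nil_iff]
          intro u _
          rw [hdead u]
          simp
        rw [h1]
        rfl
    · left
      have hE := E2_peel dic cur p hsym hl hpc hnd hcm hpm
      have hL := liveCount_peel_main dic cur p hsym hl hpc hnd hcm hpm herase
      have hLpos := liveCount_pos dic cur hclive
      rcases hcnt with hcnt | ⟨_, hcnt2⟩
      · omega
      · omega
  · -- the queue invariant
    intro x hx
    rw [peel_getD dic cur p x hpc] at hx
    by_cases h1 : x = cur
    · rw [if_pos h1] at hx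
      simp at hx
    · rw [if_neg h1] at hx
      by_cases h2 : x = p
      · rw [h2]
        exact List.mem_append_right _ List.mem_cons_self
      · rw [if_neg h2] at hx
        have := hq x hx
        rcases List.mem_cons.mp this with h3 | h3
        · exact absurd h3 h1
        · exact List.mem_append_left _ h3
  · exact phi_peel dic cur p a hsym hconn hl hpc hnd hzsum' hcm hpm hc0 hcn' hp0 hpn'
  · exact E2_peel dic cur p hsym hl hpc hnd hcm hpm

-- ---- the fuel induction over A's loop ----

theorem skip_invA (n : Nat) (dic : PySem.Dict Int (List Int)) (a : List Int)
    (cur : Int) (rest : List Int) (hInv : InvA n dic a (cur :: rest))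
    (hnot : (dic.getD cur []).length ≠ 1) : InvA n dic a rest := by
  obtain ⟨h1, h2, h3, h4, h5, h6, h7, h8, h9, hq⟩ := hInv
  refine ⟨h1, h2, h3, h4, h5, h6, h7, h8, h9, ?_⟩
  intro x hx
  rcases List.mem_cons.mp (hq x hx) with h | h
  · rw [h] at hx
    exact absurd hx hnot
  · exact h

theorem E2_zero_of_no_queue (n : Nat) (dic : PySem.Dict Int (List Int)) (a : List Int)
    (hInv : InvA n dic a []) : E2 dic = 0 := by
  obtain ⟨_, _, _, _, _, _, _, _, h9, hq⟩ := hInv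
  have hnoleaf : ∀ x : Int, (dic.getD x []).length ≠ 1 := by
    intro x hx
    exact absurd (hq x hx) (List.not_mem_nil)
  have hle := two_liveCount_le_E2 dic hnoleaf
  rcases h9 with h | ⟨h, _⟩
  · omega
  · exact h

theorem loopA_phi (fuel : Nat) : ∀ (dic : PySem.Dict Int (List Int)) (a q : List Int)
    (ans : Int) (n : Nat), InvA n dic a q → (q.length : Int) + E2 dic ≤ (fuel : Int) →
    2 * loopA fuel dic a q ans = 2 * ans + phi dic a := by
  induction fuel with
  | zero =>
    intro dic a q ans n hInv hfuel
    have hE2 := E2_nonneg dic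
    have hE0 : E2 dic = 0 := by
      have : (0:Int) ≤ q.length := by positivity
      omega
    simp only [loopA]
    rw [phi_zero dic a hE0]
    ring
  | succ fuel ih =>
    intro dic a q ans n hInv hfuel
    match q with
    | [] =>
      simp only [loopA]
      rw [phi_zero dic a (E2_zero_of_no_queue n dic a hInv)]
      ring
    | cur :: rest =>
      have hfuel' : (rest.length : Int) + E2 dic ≤ (fuel : Int) := by
        simp only [List.length_cons] at hfuel
        push_cast at hfuel ⊢
        omega
      rcases hl : dic.getD cur [] with _ | ⟨e, tl⟩
      · simp only [loopA, hl]
        exact ih dic a rest ans n (skip_invA n dic a cur rest hInv (by rw [hl]; simp)) hfuel'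
      · cases tl with
        | cons e2 t2 =>
          simp only [loopA, hl]
          exact ih dic a rest ans n
            (skip_invA n dic a cur rest hInv (by rw [hl]; simp)) hfuel'
        | nil =>
          obtain ⟨hInv₂, hphi, hE2eq, hpc, hc0, hcn, hp0, hpn⟩ :=
            peel_invA n dic a rest cur e hInv hl
          have hrem1 : PySem.List.remove? (dic.getD e []) cur
              = some ((dic.getD e []).erase cur) :=
            PySem.List.remove?_eq_some_erase _ _ (mem_p_cur dic cur e hInv.2.2.2.1 hl)
          have hd1 : ((dic.insert e ((dic.getD e []).erase cur)).getD cur ([] : List Int))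
              = [e] := by
            rw [PySem.Dict.getD_insert, if_neg (fun h => hpc h.symm)]
            exact hl
          have hrem2 : PySem.List.remove?
              ((dic.insert e ((dic.getD e []).erase cur)).getD cur ([] : List Int)) e
              = some [] := by
            rw [hd1]
            exact PySem.List.remove?_cons_self e []
          simp only [loopA, hl, hrem1, hrem2]
          show 2 * loopA fuel (peelDict dic cur e)
              (PySem.List.pySetD a e (listGet a e + listGet a cur)) (rest ++ [e])
              (ans + |listGet (PySem.List.pySetD a e (listGet a e + listGet a cur)) cur|)
            = 2 * ans + phi dic a
          rw [listGet_pySetD_ne a e _ cur hp0 hc0 (fun h => hpc h.symm)]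
          have hbound : (((rest ++ [e]).length : Nat) : Int) + E2 (peelDict dic cur e)
              ≤ (fuel : Int) := by
            rw [List.length_append]
            simp only [List.length_cons, List.length_nil]
            push_cast
            omega
          rw [ih (peelDict dic cur e) _ (rest ++ [e]) _ n hInv₂ hbound, hphi]
          ring

theorem loopA_sym (fuel : Nat) : ∀ (dic : PySem.Dict Int (List Int)) (a q : List Int)
    (n : Nat), InvA n dic a q → (q.length : Int) + E2 dic ≤ (fuel : Int) →
    ∀ u v : Int, Adj dic u v → |sideSum dic u v a| = |sideSum dic v u a| := by
  induction fuel with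
  | zero =>
    intro dic a q n hInv hfuel u v hadj
    have hE2 := E2_nonneg dic
    have hE0 : E2 dic = 0 := by
      have : (0:Int) ≤ q.length := by positivity
      omega
    exact absurd hadj (no_adj_of_E2_zero dic hE0 u v)
  | succ fuel ih =>
    intro dic a q n hInv hfuel u v hadj
    match q with
    | [] =>
      exact absurd hadj (no_adj_of_E2_zero dic (E2_zero_of_no_queue n dic a hInv) u v)
    | cur :: rest =>
      have hfuel' : (rest.length : Int) + E2 dic ≤ (fuel : Int) := by
        simp only [List.length_cons] at hfuel
        push_cast at hfuel ⊢
        omega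
      rcases hl : dic.getD cur [] with _ | ⟨e, tl⟩
      · exact ih dic a rest n (skip_invA n dic a cur rest hInv (by rw [hl]; simp))
          hfuel' u v hadj
      · cases tl with
        | cons e2 t2 =>
          exact ih dic a rest n (skip_invA n dic a cur rest hInv (by rw [hl]; simp))
            hfuel' u v hadj
        | nil =>
          obtain ⟨hInv₂, hphi, hE2eq, hpc, hc0, hcn, hp0, hpn⟩ :=
            peel_invA n dic a rest cur e hInv hl
          obtain ⟨hlen, hnd, hkr, hsym, hsimple, hnoself, hconn, hzsum, hcnt, hq⟩ := hInv
          have hcn' : cur < (a.length : Int) := by rw [hlen]; exact hcn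
          have hpn' : e < (a.length : Int) := by rw [hlen]; exact hpn
          have hzsum' : (∑ x ∈ intRange a.length, ind (dic.getD x [] ≠ []) (listGet a x)) = 0 := by
            rw [hlen]; exact hzsum
          have hfar : sideSum dic cur e a = - listGet a cur :=
            side_far dic cur e a hsym hconn hl hpc hzsum' hc0 hcn'
          have hleaf : sideSum dic e cur a = listGet a cur :=
            side_leaf dic cur e a hl hc0 hcn'
          by_cases huc : u = cur
          · have hv : v = e := by
              rw [huc, Adj, hl] at hadj
              simpa using hadj
            rw [huc, hv, hfar, hleaf, abs_neg]
          · by_cases hvc : v = cur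
            · have hu : u = e := by
                rw [hvc] at hadj
                exact adj_into_cur dic cur e u hsym hl hadj
              rw [hu, hvc, hfar, hleaf, abs_neg]
            · have hadj₂ : Adj (peelDict dic cur e) u v := by
                rw [Adj, peel_getD dic cur e u hpc, if_neg huc]
                by_cases hue : u = e
                · rw [if_pos hue]
                  rw [Adj, hue] at hadj
                  exact (List.mem_erase_of_ne hvc).mpr hadj
                · rw [if_neg hue]
                  exact hadj
              have hbound : (((rest ++ [e]).length : Nat) : Int) + E2 (peelDict dic cur e)
                  ≤ (fuel : Int) := by
                rw [List.length_append]
                simp only [List.length_cons, List.length_nil]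
                push_cast
                omega
              have h2 := ih (peelDict dic cur e) _ (rest ++ [e]) n hInv₂ hbound u v hadj₂
              rw [← side_peel dic cur e a u v hsym hl hpc hc0 hcn' hp0 hpn' huc hvc,
                  ← side_peel dic cur e a v u hsym hl hpc hc0 hcn' hp0 hpn' hvc huc]
              exact h2

-- ---- characterisation of A's dictionary build ----

theorem count_append_singleton (l : List Int) (a b : Int) :
    (l ++ [b]).count a = l.count a + if a = b then 1 else 0 := by
  rw [List.count_append]
  by_cases h : a = b
  · subst h; simp
  · have hb : ([b] : List Int).count a = 0 := by
      simp [List.count_eq_zero, h]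
    rw [hb, if_neg h]

theorem if_insert_append (d : PySem.Dict Int (List Int)) (x y : Int) :
    (if d.contains x then d.insert x (d.getD x [] ++ [y]) else d.insert x [y])
      = d.insert x (d.getD x [] ++ [y]) := by
  by_cases h : d.contains x = true
  · rw [if_pos h]
  · have h' : d.contains x = false := by revert h; cases d.contains x <;> simp
    rw [if_neg (by simp [h']), PySem.Dict.getD_of_not_contains d [] h']
    simp

-- one build step, written as two unconditional appends
def stepA (dic : PySem.Dict Int (List Int)) (e : List Int) : PySem.Dict Int (List Int) :=
  let e0 := (PySem.List.pyGet? e 0).getD 0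
  let e1 := (PySem.List.pyGet? e 1).getD 0
  let dic1 := if dic.contains e0 then dic.insert e0 ((dic.getD e0 []) ++ [e1]) else dic.insert e0 [e1]
  if dic1.contains e1 then dic1.insert e1 ((dic1.getD e1 []) ++ [e0]) else dic1.insert e1 [e0]

theorem buildA_eq (edges : List (List Int)) : buildA edges = edges.foldl stepA PySem.Dict.empty := rfl

theorem stepA_eq (dic : PySem.Dict Int (List Int)) (e : List Int) :
    stepA dic e = (dic.insert (pvE0 e) (dic.getD (pvE0 e) [] ++ [pvE1 e])).insert (pvE1 e)
      (((dic.insert (pvE0 e) (dic.getD (pvE0 e) [] ++ [pvE1 e])).getD (pvE1 e) []) ++ [pvE0 e]) := by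
  unfold stepA pvE0 pvE1
  rw [if_insert_append, if_insert_append]

theorem stepA_count (dic : PySem.Dict Int (List Int)) (u v s t : Int) :
    (((dic.insert u (dic.getD u [] ++ [v])).insert v
        (((dic.insert u (dic.getD u [] ++ [v])).getD v []) ++ [u])).getD t []).count s
      = (dic.getD t []).count s
        + (if s = u ∧ t = v then 1 else 0) + (if s = v ∧ t = u then 1 else 0) := by
  simp only [PySem.Dict.getD_insert]
  by_cases htv : t = v
  · rw [htv, if_pos rfl, count_append_singleton]
    by_cases hvu : v = u
    · rw [if_pos hvu, count_append_singleton, hvu]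
      by_cases hsu : s = u <;> simp [hsu]
    · rw [if_neg hvu]
      by_cases hsu : s = u <;> simp [hsu, hvu]
  · rw [if_neg htv]
    by_cases htu : t = u
    · have huv : ¬ u = v := fun h => htv (htu.trans h)
      rw [htu, if_pos rfl, count_append_singleton]
      by_cases hsv : s = v <;> simp [hsv, huv]
    · rw [if_neg htu]
      simp [htv, htu]

theorem build_count (edges : List (List Int)) : ∀ (dic : PySem.Dict Int (List Int)) (u v : Int),
    ((edges.foldl stepA dic).getD u []).count v
      = (dic.getD u []).count v
        + edges.countP (fun e => decide (pvE0 e = u ∧ pvE1 e = v))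
        + edges.countP (fun e => decide (pvE1 e = u ∧ pvE0 e = v)) := by
  induction edges with
  | nil => intro dic u v; simp
  | cons e es ih =>
    intro dic u v
    rw [List.foldl_cons, ih (stepA dic e) u v]
    rw [stepA_eq]
    rw [stepA_count dic (pvE0 e) (pvE1 e) v u]
    rw [List.countP_cons, List.countP_cons]
    have h1 : (if v = pvE0 e ∧ u = pvE1 e then 1 else 0)
        = (if decide (pvE1 e = u ∧ pvE0 e = v) = true then 1 else 0) := by
      by_cases h : v = pvE0 e ∧ u = pvE1 e
      · rw [if_pos h, if_pos (by simp; exact ⟨h.2.symm, h.1.symm⟩)]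
      · rw [if_neg h, if_neg (by simp; intro h2 h3; exact absurd ⟨h3.symm, h2.symm⟩ h)]
    have h2 : (if v = pvE1 e ∧ u = pvE0 e then 1 else 0)
        = (if decide (pvE0 e = u ∧ pvE1 e = v) = true then 1 else 0) := by
      by_cases h : v = pvE1 e ∧ u = pvE0 e
      · rw [if_pos h, if_pos (by simp; exact ⟨h.2.symm, h.1.symm⟩)]
      · rw [if_neg h, if_neg (by simp; intro h2 h3; exact absurd ⟨h3.symm, h2.symm⟩ h)]
    omega

theorem build_keys_mem (edges : List (List Int)) : ∀ (dic : PySem.Dict Int (List Int)) (u : Int),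
    u ∈ (edges.foldl stepA dic).keys
      ↔ u ∈ dic.keys ∨ ∃ e ∈ edges, pvE0 e = u ∨ pvE1 e = u := by
  induction edges with
  | nil => intro dic u; simp
  | cons e es ih =>
    intro dic u
    rw [List.foldl_cons, ih (stepA dic e) u, stepA_eq]
    rw [PySem.Dict.mem_keys_insert, PySem.Dict.mem_keys_insert]
    constructor
    · rintro ((h | h | h) | ⟨e', he', h⟩)
      · exact Or.inr ⟨e, List.mem_cons_self, Or.inr h.symm⟩
      · exact Or.inr ⟨e, List.mem_cons_self, Or.inl h.symm⟩
      · exact Or.inl h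
      · exact Or.inr ⟨e', List.mem_cons_of_mem _ he', h⟩
    · rintro (h | ⟨e', he', h⟩)
      · exact Or.inl (Or.inr (Or.inr h))
      · rcases List.mem_cons.mp he' with rfl | he''
        · rcases h with h | h
          · exact Or.inl (Or.inr (Or.inl h.symm))
          · exact Or.inl (Or.inl h.symm)
        · exact Or.inr ⟨e', he'', h⟩

theorem build_nodup (edges : List (List Int)) : ∀ (dic : PySem.Dict Int (List Int)),
    dic.keys.Nodup → (edges.foldl stepA dic).keys.Nodup := by
  induction edges with
  | nil => intro dic h; exact h
  | cons e es ih =>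
    intro dic h
    rw [List.foldl_cons]
    refine ih (stepA dic e) ?_
    rw [stepA_eq]
    exact PySem.Dict.nodup_keys_insert _ _ _ (PySem.Dict.nodup_keys_insert _ _ _ h)

-- the generic ordered-pair sum over the built dictionary
def DSum (dic : PySem.Dict Int (List Int)) (g : Int → Int → Int) : Int :=
  (dic.keys.map (fun u => ((dic.getD u []).map (g u)).sum)).sum

theorem DSum_insert_append (dic : PySem.Dict Int (List Int)) (k w : Int) (g : Int → Int → Int)
    (hnd : dic.keys.Nodup) :
    DSum (dic.insert k (dic.getD k [] ++ [w])) g = DSum dic g + g k w := by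
  unfold DSum
  rcases hc : dic.contains k with _ | _
  · rw [PySem.Dict.keys_insert_of_not_contains _ _ hc]
    rw [List.map_append, List.sum_append]
    have hothers : ∀ u ∈ dic.keys,
        (((dic.insert k (dic.getD k [] ++ [w])).getD u []).map (g u)).sum
          = ((dic.getD u []).map (g u)).sum := by
      intro u hu
      have huk : u ≠ k := by
        intro h
        rw [h] at hu
        rw [(PySem.Dict.contains_iff_mem_keys dic k).mpr hu] at hc
        cases hc
      rw [PySem.Dict.getD_insert, if_neg huk]
    rw [List.map_congr_left hothers]
    simp only [List.map_cons, List.map_nil, List.sum_cons, List.sum_nil]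
    rw [PySem.Dict.getD_insert, if_pos rfl, PySem.Dict.getD_of_not_contains dic [] hc]
    simp
  · rw [PySem.Dict.keys_insert_of_contains _ _ hc]
    have hkm : k ∈ dic.keys := (PySem.Dict.contains_iff_mem_keys dic k).mp hc
    rw [map_sum_one_point dic.keys
        (fun u => (((dic.insert k (dic.getD k [] ++ [w])).getD u []).map (g u)).sum)
        (fun u => ((dic.getD u []).map (g u)).sum) k hnd hkm
        (fun x _ hxk => by
          show (((dic.insert k (dic.getD k [] ++ [w])).getD x []).map (g x)).sum = _
          rw [PySem.Dict.getD_insert, if_neg hxk])]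
    show DSum dic g + ((((dic.insert k _).getD k []).map (g k)).sum - _) = DSum dic g + g k w
    rw [PySem.Dict.getD_insert, if_pos rfl]
    rw [List.map_append, List.sum_append]
    simp

theorem build_DSum (edges : List (List Int)) (g : Int → Int → Int) :
    ∀ (dic : PySem.Dict Int (List Int)), dic.keys.Nodup →
    DSum (edges.foldl stepA dic) g
      = DSum dic g + (edges.map (fun e => g (pvE0 e) (pvE1 e) + g (pvE1 e) (pvE0 e))).sum := by
  induction edges with
  | nil => intro dic _; simp
  | cons e es ih =>
    intro dic hnd
    rw [List.foldl_cons, ih (stepA dic e) (by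
      rw [stepA_eq]
      exact PySem.Dict.nodup_keys_insert _ _ _ (PySem.Dict.nodup_keys_insert _ _ _ hnd))]
    rw [stepA_eq]
    rw [DSum_insert_append _ _ _ g (PySem.Dict.nodup_keys_insert _ _ _ hnd)]
    rw [DSum_insert_append _ _ _ g hnd]
    simp only [List.map_cons, List.sum_cons]
    ring

theorem build_E2 (edges : List (List Int)) :
    E2 (buildA edges) = 2 * edges.length := by
  rw [buildA_eq]
  have h := build_DSum edges (fun _ _ => 1) PySem.Dict.empty (by
    have : (PySem.Dict.empty : PySem.Dict Int (List Int)).keys = [] := rfl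
    rw [this]
    exact List.nodup_nil)
  have hconv : ∀ (d : PySem.Dict Int (List Int)),
      (d.keys.map (fun u => ((d.getD u []).length : Int))).sum
        = (d.keys.map (fun u => ((d.getD u []).map (fun _ => (1:Int))).sum)).sum := by
    intro d
    refine congrArg List.sum (List.map_congr_left ?_)
    intro u _
    simp
  unfold E2
  rw [hconv]
  unfold DSum at h
  rw [h]
  simp
  ring

-- ---- the initial state satisfies the invariant ----

theorem countP_or_disjoint {α : Type} (l : List α) (P Q : α → Bool)
    (hdisj : ∀ e ∈ l, ¬(P e = true ∧ Q e = true)) :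
    l.countP (fun e => P e || Q e) = l.countP P + l.countP Q := by
  induction l with
  | nil => simp
  | cons e t ih =>
    rw [List.countP_cons, List.countP_cons, List.countP_cons,
        ih (fun x hx => hdisj x (List.mem_cons_of_mem _ hx))]
    have := hdisj e List.mem_cons_self
    rcases hP : P e with _ | _ <;> rcases hQ : Q e with _ | _ <;> simp_all <;> omega

theorem countP_le_one_of_map_nodup {α β : Type} (l : List α) (f : α → β)
    (hnd : (l.map f).Nodup) (P : α → Bool) (c : β)
    (hPc : ∀ e ∈ l, P e = true → f e = c) : l.countP P ≤ 1 := by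
  induction l with
  | nil => simp
  | cons e t ih =>
    rw [List.countP_cons]
    rw [List.map_cons, List.nodup_cons] at hnd
    by_cases hP : P e = true
    · have ht : t.countP P = 0 := by
        rw [List.countP_eq_zero]
        intro x hx hPx
        have hfe := hPc e List.mem_cons_self hP
        have hfx := hPc x (List.mem_cons_of_mem _ hx) hPx
        exact hnd.1 (by rw [hfe, ← hfx]; exact List.mem_map_of_mem hx)
      rw [ht, hP]
      simp
    · have := ih hnd.2 (fun x hx hPx => hPc x (List.mem_cons_of_mem _ hx) hPx)
      simp only [hP]
      simp
      omega

theorem getD_empty_int (u : Int) : (PySem.Dict.empty : PySem.Dict Int (List Int)).getD u [] = [] := rfl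

theorem build_count0 (edges : List (List Int)) (u v : Int) :
    ((buildA edges).getD u []).count v
      = edges.countP (fun e => decide (pvE0 e = u ∧ pvE1 e = v))
        + edges.countP (fun e => decide (pvE1 e = u ∧ pvE0 e = v)) := by
  rw [buildA_eq, build_count edges PySem.Dict.empty u v, getD_empty_int]
  simp

-- under Pre_'s edge conditions each unordered pair occurs at most once
theorem build_simple (edges : List (List Int))
    (hedge : ∀ e ∈ edges, pvE0 e ≠ pvE1 e)
    (hndc : (edges.map (fun e => if pvE0 e ≤ pvE1 e then (pvE0 e, pvE1 e) else (pvE1 e, pvE0 e))).Nodup) :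
    ∀ u v : Int, ((buildA edges).getD u []).count v ≤ 1 := by
  intro u v
  rw [build_count0]
  have hdisj : ∀ e ∈ edges, ¬((decide (pvE0 e = u ∧ pvE1 e = v)) = true
      ∧ (decide (pvE1 e = u ∧ pvE0 e = v)) = true) := by
    intro e he ⟨h1, h2⟩
    simp at h1 h2
    exact hedge e he (by omega)
  rw [← countP_or_disjoint edges _ _ hdisj]
  refine countP_le_one_of_map_nodup edges _ hndc _ (if u ≤ v then (u, v) else (v, u)) ?_
  intro e _ hPe
  simp only [Bool.or_eq_true, decide_eq_true_eq] at hPe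
  rcases hPe with ⟨h0, h1⟩ | ⟨h0, h1⟩
  · rw [h0, h1]
  · rw [h0, h1]
    by_cases hle : v ≤ u
    · rw [if_pos hle]
      by_cases hle2 : u ≤ v
      · rw [if_pos hle2]
        have : u = v := le_antisymm hle2 hle
        rw [this]
      · rw [if_neg hle2]
    · rw [if_neg hle]
      rw [if_pos (by omega)]

theorem build_noself (edges : List (List Int))
    (hedge : ∀ e ∈ edges, pvE0 e ≠ pvE1 e) :
    ∀ x : Int, x ∉ (buildA edges).getD x [] := by
  intro x hmem
  have h1 : 0 < ((buildA edges).getD x []).count x := List.count_pos_iff.mpr hmem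
  rw [build_count0] at h1
  have h2 : edges.countP (fun e => decide (pvE0 e = x ∧ pvE1 e = x)) = 0 := by
    rw [List.countP_eq_zero]
    intro e he hPe
    simp at hPe
    exact hedge e he (by omega)
  have h3 : edges.countP (fun e => decide (pvE1 e = x ∧ pvE0 e = x)) = 0 := by
    rw [List.countP_eq_zero]
    intro e he hPe
    simp at hPe
    exact hedge e he (by omega)
  omega

theorem build_sym (edges : List (List Int)) :
    ∀ u v : Int, ((buildA edges).getD u []).count v = ((buildA edges).getD v []).count u := by
  intro u v
  rw [build_count0, build_count0]
  have h1 : (fun (e : List Int) => decide (pvE0 e = u ∧ pvE1 e = v))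
      = (fun (e : List Int) => decide (pvE1 e = v ∧ pvE0 e = u)) := by
    funext e
    simp [and_comm]
  have h2 : (fun (e : List Int) => decide (pvE1 e = u ∧ pvE0 e = v))
      = (fun (e : List Int) => decide (pvE0 e = v ∧ pvE1 e = u)) := by
    funext e
    simp [and_comm]
  rw [h1, h2]
  omega

theorem adj_of_edge (edges : List (List Int)) (e : List Int) (he : e ∈ edges) :
    Adj (buildA edges) (pvE0 e) (pvE1 e) := by
  rw [Adj, ← List.count_pos_iff, build_count0]
  have h1 : 0 < edges.countP (fun e' => decide (pvE0 e' = pvE0 e ∧ pvE1 e' = pvE1 e)) := by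
    rw [List.countP_pos_iff]
    exact ⟨e, he, by simp⟩
  omega

-- membership in the closure implies graph reachability from 0
theorem reachStep_reach (edges : List (List Int)) (l : List (List Int))
    (hsub : ∀ e ∈ l, e ∈ edges) (s : List Int)
    (hs : ∀ x ∈ s, Reach (buildA edges) (fun _ => True) 0 x) :
    ∀ x ∈ l.foldl (fun s e =>
      let s1 := if pvE0 e ∈ s ∧ pvE1 e ∉ s then s ++ [pvE1 e] else s
      if pvE1 e ∈ s1 ∧ pvE0 e ∉ s1 then s1 ++ [pvE0 e] else s1) s,
      Reach (buildA edges) (fun _ => True) 0 x := by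
  induction l generalizing s with
  | nil => exact hs
  | cons e t ih =>
    rw [List.foldl_cons]
    refine ih (fun e' he' => hsub e' (List.mem_cons_of_mem _ he')) _ ?_
    intro x hx
    have hadj0 := adj_of_edge edges e (hsub e List.mem_cons_self)
    have hadj1 := Adj_symm (build_sym edges) hadj0
    by_cases hc1 : pvE0 e ∈ s ∧ pvE1 e ∉ s
    · rw [if_pos hc1] at hx
      by_cases hc2 : pvE1 e ∈ s ++ [pvE1 e] ∧ pvE0 e ∉ s ++ [pvE1 e]
      · rw [if_pos hc2] at hx
        exact absurd (List.mem_append_left _ hc1.1) hc2.2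
      · rw [if_neg hc2] at hx
        rcases List.mem_append.mp hx with h | h
        · exact hs x h
        · have : x = pvE1 e := by simpa using h
          rw [this]
          exact (hs _ hc1.1).snoc hadj0 trivial
    · rw [if_neg hc1] at hx
      by_cases hc2 : pvE1 e ∈ s ∧ pvE0 e ∉ s
      · rw [if_pos hc2] at hx
        rcases List.mem_append.mp hx with h | h
        · exact hs x h
        · have : x = pvE0 e := by simpa using h
          rw [this]
          exact (hs _ hc2.1).snoc hadj1 trivial
      · rw [if_neg hc2] at hx
        exact hs x hx

theorem reachClose_reach (edges : List (List Int)) (k : Nat) :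
    ∀ x ∈ reachClose edges k, Reach (buildA edges) (fun _ => True) 0 x := by
  induction k with
  | zero =>
    intro x hx
    have : x = 0 := by simpa [reachClose] using hx
    rw [this]
    exact Reach.refl
  | succ k ih =>
    intro x hx
    exact reachStep_reach edges edges (fun _ h => h) _ ih x hx

theorem reachClose_occurs (edges : List (List Int)) (k : Nat) :
    ∀ x ∈ reachClose edges k, x = 0 ∨ ∃ e ∈ edges, pvE0 e = x ∨ pvE1 e = x := by
  induction k with
  | zero =>
    intro x hx
    left
    simpa [reachClose] using hx
  | succ k ih =>
    have hgen : ∀ (l : List (List Int)), (∀ e ∈ l, e ∈ edges) →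
        ∀ (s : List Int), (∀ x ∈ s, x = 0 ∨ ∃ e ∈ edges, pvE0 e = x ∨ pvE1 e = x) →
        ∀ x ∈ l.foldl (fun s e =>
          let s1 := if pvE0 e ∈ s ∧ pvE1 e ∉ s then s ++ [pvE1 e] else s
          if pvE1 e ∈ s1 ∧ pvE0 e ∉ s1 then s1 ++ [pvE0 e] else s1) s,
          x = 0 ∨ ∃ e ∈ edges, pvE0 e = x ∨ pvE1 e = x := by
      intro l
      induction l with
      | nil => intro _ s hs; exact hs
      | cons e t iht =>
        intro hsub s hs
        rw [List.foldl_cons]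
        refine iht (fun e' he' => hsub e' (List.mem_cons_of_mem _ he')) _ ?_
        intro x hx
        have hee : e ∈ edges := hsub e List.mem_cons_self
        by_cases hc1 : pvE0 e ∈ s ∧ pvE1 e ∉ s
        · rw [if_pos hc1] at hx
          by_cases hc2 : pvE1 e ∈ s ++ [pvE1 e] ∧ pvE0 e ∉ s ++ [pvE1 e]
          · rw [if_pos hc2] at hx
            rcases List.mem_append.mp hx with h | h
            · rcases List.mem_append.mp h with h' | h'
              · exact hs x h'
              · have hx1 : x = pvE1 e := by simpa using h'
                exact Or.inr ⟨e, hee, Or.inr hx1.symm⟩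
            · have hx0 : x = pvE0 e := by simpa using h
              exact Or.inr ⟨e, hee, Or.inl hx0.symm⟩
          · rw [if_neg hc2] at hx
            rcases List.mem_append.mp hx with h | h
            · exact hs x h
            · have hx1 : x = pvE1 e := by simpa using h
              exact Or.inr ⟨e, hee, Or.inr hx1.symm⟩
        · rw [if_neg hc1] at hx
          by_cases hc2 : pvE1 e ∈ s ∧ pvE0 e ∉ s
          · rw [if_pos hc2] at hx
            rcases List.mem_append.mp hx with h | h
            · exact hs x h
            · have hx0 : x = pvE0 e := by simpa using h
              exact Or.inr ⟨e, hee, Or.inl hx0.symm⟩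
          · rw [if_neg hc2] at hx
            exact hs x hx
    intro x hx
    exact hgen edges (fun _ h => h) _ ih x hx

theorem occurs_live (edges : List (List Int)) (x : Int)
    (h : ∃ e ∈ edges, pvE0 e = x ∨ pvE1 e = x) : (buildA edges).getD x [] ≠ [] := by
  obtain ⟨e, he, h⟩ := h
  rcases h with h | h
  · have := adj_of_edge edges e he
    rw [h] at this
    exact List.ne_nil_of_mem this
  · have := Adj_symm (build_sym edges) (adj_of_edge edges e he)
    rw [h] at this
    exact List.ne_nil_of_mem this

theorem live_all (a : List Int) (edges : List (List Int)) (hne : edges ≠ [])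
    (hE : edges.length + 1 = a.length)
    (hreach : ∀ v ∈ List.range a.length, (v : Int) ∈ reachClose edges edges.length) :
    ∀ x : Int, 0 ≤ x → x < (a.length : Int) → (buildA edges).getD x [] ≠ [] := by
  have hn2 : 2 ≤ a.length := by
    have : 0 < edges.length := List.length_pos_iff.mpr hne
    omega
  intro x hx0 hxn
  have hxm : x.toNat ∈ List.range a.length := List.mem_range.mpr (by omega)
  have hxc : (x.toNat : Int) ∈ reachClose edges edges.length := hreach x.toNat hxm
  have hxeq : ((x.toNat : Nat) : Int) = x := by omega
  rw [hxeq] at hxc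
  rcases reachClose_occurs edges edges.length x hxc with h0 | hocc
  · -- x = 0: use that vertex 1 exists and is connected to 0
    subst h0
    have h1m : (1 : Nat) ∈ List.range a.length := List.mem_range.mpr (by omega)
    have h1c := hreach 1 h1m
    have hr01 : Reach (buildA edges) (fun _ => True) 0 1 :=
      reachClose_reach edges edges.length _ h1c
    have hr10 : Reach (buildA edges) (fun _ => True) 1 0 :=
      Reach_rev (build_sym edges) hr01
    obtain ⟨z, _, ha, _⟩ := Reach_tail hr10 (by norm_num)
    have h1 : 0 < ((buildA edges).getD z []).count (0:Int) := List.count_pos_iff.mpr ha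
    rw [build_sym edges z 0] at h1
    exact List.ne_nil_of_mem (List.count_pos_iff.mp h1)
  · exact occurs_live edges x hocc

theorem initial_invA (a : List Int) (edges : List (List Int))
    (hsum : a.sum = 0)
    (hE : edges.length + 1 = a.length)
    (hedge : ∀ e ∈ edges, e.length = 2 ∧ 0 ≤ pvE0 e ∧ pvE0 e < (a.length : Int) ∧
       0 ≤ pvE1 e ∧ pvE1 e < (a.length : Int) ∧ pvE0 e ≠ pvE1 e)
    (hndc : (edges.map (fun e => if pvE0 e ≤ pvE1 e then (pvE0 e, pvE1 e) else (pvE1 e, pvE0 e))).Nodup)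
    (hreach : ∀ v ∈ List.range a.length, (v : Int) ∈ reachClose edges edges.length) :
    InvA a.length (buildA edges) a
      ((buildA edges).keys.filter (fun d => ((buildA edges).getD d []).length == 1)) := by
  have hnd0 : (buildA edges).keys.Nodup := by
    rw [buildA_eq]
    refine build_nodup edges PySem.Dict.empty ?_
    have : (PySem.Dict.empty : PySem.Dict Int (List Int)).keys = [] := rfl
    rw [this]
    exact List.nodup_nil
  have hkeysmem : ∀ u : Int, u ∈ (buildA edges).keys ↔ ∃ e ∈ edges, pvE0 e = u ∨ pvE1 e = u := by
    intro u
    rw [buildA_eq, build_keys_mem edges PySem.Dict.empty u]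
    have : (PySem.Dict.empty : PySem.Dict Int (List Int)).keys = [] := rfl
    rw [this]
    simp
  have hkr : ∀ u ∈ (buildA edges).keys, 0 ≤ u ∧ u < (a.length : Int) := by
    intro u hu
    obtain ⟨e, he, h⟩ := (hkeysmem u).mp hu
    obtain ⟨_, h0, h1, h2, h3, _⟩ := hedge e he
    rcases h with h | h
    · rw [← h]; exact ⟨h0, h1⟩
    · rw [← h]; exact ⟨h2, h3⟩
  have hedge' : ∀ e ∈ edges, pvE0 e ≠ pvE1 e := fun e he => (hedge e he).2.2.2.2.2
  have hsym := build_sym edges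
  have hconn : ∀ x y : Int, (buildA edges).getD x [] ≠ [] → (buildA edges).getD y [] ≠ [] →
      Reach (buildA edges) (fun _ => True) x y := by
    intro x y hx hy
    obtain ⟨hx0, hxn⟩ := hkr x (live_mem_keys hx)
    obtain ⟨hy0, hyn⟩ := hkr y (live_mem_keys hy)
    have hxm : x.toNat ∈ List.range a.length := List.mem_range.mpr (by omega)
    have hym : y.toNat ∈ List.range a.length := List.mem_range.mpr (by omega)
    have hxc := hreach x.toNat hxm
    have hyc := hreach y.toNat hym
    have hxeq : ((x.toNat : Nat) : Int) = x := by omega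
    have hyeq : ((y.toNat : Nat) : Int) = y := by omega
    rw [hxeq] at hxc
    rw [hyeq] at hyc
    exact Reach.trans (Reach_rev hsym (reachClose_reach edges edges.length x hxc))
      (reachClose_reach edges edges.length y hyc)
  refine ⟨rfl, hnd0, hkr, hsym, build_simple edges hedge' hndc, build_noself edges hedge',
      hconn, ?_, ?_, ?_⟩
  · -- the zero sum
    rcases heq : edges with _ | ⟨e0, es⟩
    · subst heq
      refine Finset.sum_eq_zero ?_
      intro x _
      refine ind_neg ?_
      intro h
      exact h (getD_empty_int x)
    · rw [← heq]
      have hne : edges ≠ [] := by rw [heq]; simp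
      have hlive := live_all a edges hne hE hreach
      have h1 : ∀ x ∈ intRange a.length,
          ind ((buildA edges).getD x [] ≠ []) (listGet a x) = listGet a x := by
        intro x hx
        obtain ⟨hx0, hxn⟩ := mem_intRange.mp hx
        exact ind_pos (hlive x hx0 hxn)
      rw [Finset.sum_congr rfl h1, sum_intRange_listGet a, hsum]
  · -- the counting invariant
    rcases heq : edges with _ | ⟨e0, es⟩
    · right
      subst heq
      constructor
      · rw [build_E2]
        simp
      · rfl
    · left
      rw [← heq]
      have hne : edges ≠ [] := by rw [heq]; simp
      have hlive := live_all a edges hne hE hreach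
      have hkeyiff : ∀ u : Int, u ∈ (buildA edges).keys ↔ u ∈ intRange a.length := by
        intro u
        rw [mem_intRange]
        constructor
        · exact hkr u
        · rintro ⟨h0, h1⟩
          exact live_mem_keys (hlive u h0 h1)
      have hfin : (buildA edges).keys.toFinset = intRange a.length := by
        ext u
        rw [List.mem_toFinset]
        exact hkeyiff u
      have hklen : (buildA edges).keys.length = a.length := by
        have h1 := List.toFinset_card_of_nodup hnd0
        rw [hfin] at h1
        unfold intRange at h1
        rw [Finset.card_map, Finset.card_range] at h1
        omega
      have hfilter : (buildA edges).keys.filter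
          (fun u => !((buildA edges).getD u [] == ([] : List Int))) = (buildA edges).keys := by
        rw [List.filter_eq_self]
        intro u hu
        obtain ⟨h0, h1⟩ := hkr u hu
        rw [beq_eq_false_iff_ne.mpr (hlive u h0 h1)]
        rfl
      unfold liveCount
      rw [hfilter, hklen, build_E2]
      omega
  · -- the queue invariant
    intro x hx
    rw [List.mem_filter]
    refine ⟨live_mem_keys (by
      intro h
      rw [h] at hx
      simp at hx), ?_⟩
    rw [hx]
    rfl

-- ---- B side: indexed reads and the adjacency array ----

theorem pyGetD_setD_self {α : Type} (xs : List α) (i : Int) (w d : α)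
    (h0 : 0 ≤ i) (hn : i < (xs.length : Int)) :
    PySem.List.pyGetD (PySem.List.pySetD xs i w) i d = w := by
  have hi : i = ((i.toNat : Nat) : Int) := by omega
  rw [hi, PySem.List.pyGetD_pySetD_natCast xs i.toNat i.toNat w d (by omega)]
  simp

theorem pyGetD_setD_ne {α : Type} (xs : List α) (i x : Int) (w d : α)
    (hi0 : 0 ≤ i) (hin : i < (xs.length : Int)) (hx0 : 0 ≤ x) (hxi : x ≠ i) :
    PySem.List.pyGetD (PySem.List.pySetD xs i w) x d = PySem.List.pyGetD xs x d := by
  have hi : i = ((i.toNat : Nat) : Int) := by omega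
  have hx : x = ((x.toNat : Nat) : Int) := by omega
  rw [hi, hx, PySem.List.pyGetD_pySetD_natCast xs i.toNat x.toNat w d (by omega)]
  rw [if_neg (by omega)]

theorem seenAt_eq_pyGetD (seen : List Bool) (i : Int) :
    seenAt seen i = PySem.List.pyGetD seen i true := rfl

-- the neighbour list B's array holds is exactly A's dictionary entry
def getL (adj : List (List Int)) (i : Int) : List Int := (PySem.List.pyGet? adj i).getD []

theorem getL_eq_pyGetD (adj : List (List Int)) (i : Int) :
    getL adj i = PySem.List.pyGetD adj i [] := rfl

def stepB (adj : List (List Int)) (e : List Int) : List (List Int) :=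
  let u := (PySem.List.pyGet? e 0).getD 0
  let v := (PySem.List.pyGet? e 1).getD 0
  let adj1 := PySem.List.pySetD adj u ((PySem.List.pyGet? adj u).getD [] ++ [v])
  PySem.List.pySetD adj1 v ((PySem.List.pyGet? adj1 v).getD [] ++ [u])

theorem buildAdjB_eq (n : Nat) (edges : List (List Int)) :
    buildAdjB n edges = edges.foldl stepB (List.replicate n []) := rfl

theorem stepB_eq (adj : List (List Int)) (e : List Int) :
    stepB adj e
      = PySem.List.pySetD (PySem.List.pySetD adj (pvE0 e) (getL adj (pvE0 e) ++ [pvE1 e]))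
          (pvE1 e)
          (getL (PySem.List.pySetD adj (pvE0 e) (getL adj (pvE0 e) ++ [pvE1 e])) (pvE1 e)
            ++ [pvE0 e]) := rfl

theorem adjB_fold (n : Nat) (edges : List (List Int))
    (hedge : ∀ e ∈ edges, 0 ≤ pvE0 e ∧ pvE0 e < (n : Int) ∧ 0 ≤ pvE1 e ∧ pvE1 e < (n : Int)) :
    ∀ (l : List (List Int)), (∀ e ∈ l, e ∈ edges) →
      ∀ (adj : List (List Int)) (dic : PySem.Dict Int (List Int)), adj.length = n →
      (∀ x : Int, 0 ≤ x → x < (n : Int) → getL adj x = dic.getD x []) →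
      (l.foldl stepB adj).length = n ∧
      (∀ x : Int, 0 ≤ x → x < (n : Int) →
        getL (l.foldl stepB adj) x = (l.foldl stepA dic).getD x []) := by
  intro l
  induction l with
  | nil =>
    intro _ adj dic hlen hrel
    exact ⟨hlen, hrel⟩
  | cons e t ih =>
    intro hsub adj dic hlen hrel
    rw [List.foldl_cons, List.foldl_cons]
    obtain ⟨h0, h1, h2, h3⟩ := hedge e (hsub e List.mem_cons_self)
    have hlen1 : (PySem.List.pySetD adj (pvE0 e) (getL adj (pvE0 e) ++ [pvE1 e])).length = n := by
      rw [PySem.List.length_pySetD]; exact hlen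
    have hrel1 : ∀ x : Int, 0 ≤ x → x < (n : Int) →
        getL (PySem.List.pySetD adj (pvE0 e) (getL adj (pvE0 e) ++ [pvE1 e])) x
        = (dic.insert (pvE0 e) (dic.getD (pvE0 e) [] ++ [pvE1 e])).getD x [] := by
      intro x hx0 hxn
      rw [getL_eq_pyGetD, PySem.Dict.getD_insert]
      by_cases hxu : x = pvE0 e
      · rw [if_pos hxu, hxu, pyGetD_setD_self _ _ _ _ h0 (by omega)]
        rw [hrel (pvE0 e) h0 h1]
      · rw [if_neg hxu, pyGetD_setD_ne _ _ _ _ _ h0 (by omega) hx0 hxu]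
        rw [← getL_eq_pyGetD, hrel x hx0 hxn]
    rw [stepB_eq, stepA_eq]
    refine ih (fun e' he' => hsub e' (List.mem_cons_of_mem _ he')) _ _ ?_ ?_
    · rw [PySem.List.length_pySetD]
      exact hlen1
    · intro x hx0 hxn
      rw [getL_eq_pyGetD, PySem.Dict.getD_insert]
      by_cases hxv : x = pvE1 e
      · rw [if_pos hxv, hxv, pyGetD_setD_self _ _ _ _ h2 (by rw [hlen1]; omega)]
        rw [hrel1 (pvE1 e) h2 h3]
      · rw [if_neg hxv, pyGetD_setD_ne _ _ _ _ _ h2 (by rw [hlen1]; omega) hx0 hxv]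
        rw [← getL_eq_pyGetD, hrel1 x hx0 hxn]

theorem adjB_rel (n : Nat) (edges : List (List Int))
    (hedge : ∀ e ∈ edges, 0 ≤ pvE0 e ∧ pvE0 e < (n : Int) ∧ 0 ≤ pvE1 e ∧ pvE1 e < (n : Int)) :
    ∀ x : Int, 0 ≤ x → x < (n : Int) →
      getL (buildAdjB n edges) x = (buildA edges).getD x [] := by
  intro x hx0 hxn
  rw [buildAdjB_eq, buildA_eq]
  refine (adjB_fold n edges hedge edges (fun _ he => he) (List.replicate n [])
    PySem.Dict.empty (List.length_replicate) ?_).2 x hx0 hxn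
  intro y hy0 hyn
  rw [getD_empty_int, getL_eq_pyGetD]
  have hy : y = ((y.toNat : Nat) : Int) := by omega
  rw [hy, PySem.List.pyGetD_natCast, List.getD_eq_getElem?_getD, List.getElem?_replicate,
      if_pos (by omega)]
  rfl

-- ---- the DFS marking array ----

theorem seenAt_set_self (seen : List Bool) (i : Int)
    (h0 : 0 ≤ i) (hn : i < (seen.length : Int)) :
    seenAt (PySem.List.pySetD seen i true) i = true := by
  rw [seenAt_eq_pyGetD]
  exact pyGetD_setD_self seen i true true h0 hn

theorem seenAt_set_ne (seen : List Bool) (i x : Int)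
    (h0 : 0 ≤ i) (hn : i < (seen.length : Int)) (hx0 : 0 ≤ x) (hxi : x ≠ i) :
    seenAt (PySem.List.pySetD seen i true) x = seenAt seen x := by
  rw [seenAt_eq_pyGetD, seenAt_eq_pyGetD]
  exact pyGetD_setD_ne seen i x true true h0 hn hx0 hxi

theorem count_false_set_nat (l : List Bool) : ∀ (i : Nat), i < l.length → l.getD i true = false →
    (l.set i true).count false + 1 = l.count false := by
  induction l with
  | nil => intro i h; simp at h
  | cons b t ih =>
    intro i hi hf
    cases i with
    | zero =>
      simp only [List.getD_cons_zero] at hf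
      rw [hf]
      simp
    | succ j =>
      simp only [List.getD_cons_succ] at hf
      rw [List.set_cons_succ]
      simp only [List.count_cons]
      have := ih j (by simpa using hi) hf
      omega

theorem count_false_set (seen : List Bool) (i : Int)
    (h0 : 0 ≤ i) (hn : i < (seen.length : Int)) (hf : seenAt seen i = false) :
    (PySem.List.pySetD seen i true).count false + 1 = seen.count false := by
  rw [PySem.List.pySetD_of_nonneg seen true h0]
  refine count_false_set_nat seen i.toNat (by omega) ?_
  rw [seenAt_eq_pyGetD] at hf
  have hi : i = ((i.toNat : Nat) : Int) := by omega
  rw [hi, PySem.List.pyGetD_natCast] at hf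
  exact hf

theorem pushNbrs_spec (n : Nat) (nbrs : List Int) (hnd : nbrs.Nodup)
    (hrange : ∀ y ∈ nbrs, 0 ≤ y ∧ y < (n : Int)) :
    ∀ (seen : List Bool) (st : List Int), seen.length = n →
      (pushNbrs nbrs (seen, st)).1.length = n ∧
      (pushNbrs nbrs (seen, st)).2 = st ++ nbrs.filter (fun y => !(seenAt seen y)) ∧
      (∀ x : Int, 0 ≤ x →
        seenAt (pushNbrs nbrs (seen, st)).1 x = (seenAt seen x || decide (x ∈ nbrs))) ∧
      (pushNbrs nbrs (seen, st)).1.count false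
        + (nbrs.filter (fun y => !(seenAt seen y))).length = seen.count false := by
  induction nbrs with
  | nil =>
    intro seen st hlen
    refine ⟨hlen, by simp [pushNbrs], ?_, by simp [pushNbrs]⟩
    intro x _
    simp [pushNbrs]
  | cons y t ih =>
    intro seen st hlen
    obtain ⟨hy0, hyn⟩ := hrange y List.mem_cons_self
    have hstep : pushNbrs (y :: t) (seen, st)
        = pushNbrs t (if seenAt seen y then (seen, st)
            else (PySem.List.pySetD seen y true, st ++ [y])) := rfl
    rcases hs : seenAt seen y with _ | _
    · -- y not seen yet: mark and push
      rw [hstep, if_neg (by rw [hs]; simp)]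
      have hlen1 : (PySem.List.pySetD seen y true).length = n := by
        rw [PySem.List.length_pySetD]; exact hlen
      have hyn' : y < ((seen.length : Nat) : Int) := by rw [hlen]; exact hyn
      obtain ⟨ih1, ih2, ih3, ih4⟩ := ih (List.nodup_cons.mp hnd).2
        (fun z hz => hrange z (List.mem_cons_of_mem _ hz)) (PySem.List.pySetD seen y true)
        (st ++ [y]) hlen1
      have hfilter : t.filter (fun z => !(seenAt (PySem.List.pySetD seen y true) z))
          = t.filter (fun z => !(seenAt seen z)) := by
        refine List.filter_congr ?_
        intro z hz
        have hzy : z ≠ y := fun h => (List.nodup_cons.mp hnd).1 (h ▸ hz)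
        rw [seenAt_set_ne seen y z hy0 hyn' (hrange z (List.mem_cons_of_mem _ hz)).1 hzy]
      have hfcons : (y :: t).filter (fun z => !(seenAt seen z))
          = y :: t.filter (fun z => !(seenAt seen z)) := by
        rw [List.filter_cons, hs]
        simp
      refine ⟨ih1, ?_, ?_, ?_⟩
      · rw [ih2, hfilter, hfcons, List.append_assoc]
        rfl
      · intro x hx0
        rw [ih3 x hx0]
        by_cases hxy : x = y
        · rw [hxy, seenAt_set_self seen y hy0 hyn']
          simp
        · rw [seenAt_set_ne seen y x hy0 hyn' hx0 hxy]
          have : decide (x ∈ y :: t) = decide (x ∈ t) := by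
            simp [List.mem_cons, hxy]
          rw [this]
      · rw [hfilter] at ih4
        rw [hfcons]
        have hcf := count_false_set seen y hy0 hyn' hs
        simp only [List.length_cons]
        omega
    · -- y already seen: skip
      rw [hstep, if_pos (by rw [hs])]
      obtain ⟨ih1, ih2, ih3, ih4⟩ := ih (List.nodup_cons.mp hnd).2
        (fun z hz => hrange z (List.mem_cons_of_mem _ hz)) seen st hlen
      have hfcons : (y :: t).filter (fun z => !(seenAt seen z))
          = t.filter (fun z => !(seenAt seen z)) := by
        rw [List.filter_cons, hs]
        simp
      refine ⟨ih1, by rw [ih2, hfcons], ?_, by rw [hfcons]; exact ih4⟩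
      intro x hx0
      rw [ih3 x hx0]
      by_cases hxy : x = y
      · rw [hxy, hs]
        simp
      · have : decide (x ∈ y :: t) = decide (x ∈ t) := by
          simp [List.mem_cons, hxy]
        rw [this]

-- ---- the per-edge DFS computes the side sum ----

def DfsInv (n : Nat) (dic0 : PySem.Dict Int (List Int)) (a : List Int) (u v : Int)
    (seen : List Bool) (stack : List Int) (s : Int) : Prop :=
  seen.length = n ∧ stack.Nodup ∧
  (∀ x ∈ stack, 0 ≤ x ∧ x < (n : Int) ∧ seenAt seen x = true ∧ x ≠ u) ∧
  seenAt seen v = true ∧ seenAt seen u = true ∧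
  (∀ x : Int, 0 ≤ x → x < (n : Int) → seenAt seen x = true →
    x = u ∨ Reach dic0 (fun z => z ≠ u) v x) ∧
  s = (∑ x ∈ intRange n, ind (seenAt seen x = true ∧ x ≠ u ∧ x ∉ stack) (listGet a x)) ∧
  (∀ x : Int, 0 ≤ x → x < (n : Int) → seenAt seen x = true → x ≠ u → x ∉ stack →
    ∀ y ∈ dic0.getD x [], seenAt seen y = true)

theorem dfs_final (n : Nat) (dic0 : PySem.Dict Int (List Int)) (a : List Int) (u v : Int)
    (hlen_a : a.length = n)
    (hsym0 : ∀ x y : Int, (dic0.getD x []).count y = (dic0.getD y []).count x)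
    (hkr0 : ∀ x ∈ dic0.keys, 0 ≤ x ∧ x < (n : Int))
    (hvu : v ≠ u) (hv0 : 0 ≤ v) (hvn : v < (n : Int))
    (seen : List Bool) (s : Int) (hInv : DfsInv n dic0 a u v seen [] s) :
    s = sideSum dic0 u v a := by
  obtain ⟨hlen, _, _, hsv, _, hsound, hacc, hclosed⟩ := hInv
  have hcomplete : ∀ (k : Nat) (x : Int), RK dic0 (fun z => z ≠ u) k v x →
      seenAt seen x = true := by
    intro k
    induction k with
    | zero =>
      intro x hx
      rw [hx]
      exact hsv
    | succ k ih =>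
      intro x hx
      rcases hx with hx | ⟨z, hz, ha, ho⟩
      · exact ih x hx
      · have hsz := ih z hz
        have hzu : z ≠ u := Reach_blocked_ne ⟨k, hz⟩ hvu
        have hzrange : 0 ≤ z ∧ z < (n : Int) := by
          rcases reach_range hsym0 hkr0 ⟨k, hz⟩ with rfl | h
          · exact ⟨hv0, hvn⟩
          · exact h
        exact hclosed z hzrange.1 hzrange.2 hsz hzu (List.not_mem_nil) x ha
  rw [hacc]
  unfold sideSum
  rw [hlen_a]
  refine Finset.sum_congr rfl ?_
  intro x hx
  obtain ⟨hx0, hxn⟩ := mem_intRange.mp hx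
  refine ind_congr ?_ rfl
  constructor
  · rintro ⟨h1, h2, _⟩
    exact (hsound x hx0 hxn h1).resolve_left h2
  · intro h
    have h' := h
    obtain ⟨k, hk⟩ := h'
    exact ⟨hcomplete k x hk, Reach_blocked_ne h hvu, List.not_mem_nil⟩

theorem dfs_run (n : Nat) (dic0 : PySem.Dict Int (List Int)) (adj : List (List Int))
    (a : List Int) (u v : Int)
    (hlen_a : a.length = n)
    (hadj : ∀ x : Int, 0 ≤ x → x < (n : Int) → getL adj x = dic0.getD x [])
    (hsym0 : ∀ x y : Int, (dic0.getD x []).count y = (dic0.getD y []).count x)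
    (hsimple0 : ∀ x y : Int, (dic0.getD x []).count y ≤ 1)
    (hkr0 : ∀ x ∈ dic0.keys, 0 ≤ x ∧ x < (n : Int))
    (hvu : v ≠ u) (hv0 : 0 ≤ v) (hvn : v < (n : Int)) (hu0 : 0 ≤ u) :
    ∀ (fuel : Nat) (seen : List Bool) (stack : List Int) (s : Int),
      DfsInv n dic0 a u v seen stack s →
      (stack.length : Int) + 2 * (seen.count false : Int) ≤ (fuel : Int) →
      dfsB fuel adj a seen stack s = sideSum dic0 u v a := by
  have entries_range : ∀ z y : Int, y ∈ dic0.getD z [] → 0 ≤ y ∧ y < (n : Int) := by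
    intro z y hy
    refine hkr0 y (live_mem_keys ?_)
    have h1 : 0 < (dic0.getD z []).count y := List.count_pos_iff.mpr hy
    rw [hsym0 z y] at h1
    exact List.ne_nil_of_mem (List.count_pos_iff.mp h1)
  intro fuel
  induction fuel with
  | zero =>
    intro seen stack s hInv hfuel
    have hstack : stack = [] := by
      have h1 : (0:Int) ≤ stack.length := by positivity
      have h2 : (0:Int) ≤ (seen.count false : Int) := by positivity
      have h3 : stack.length = 0 := by omega
      exact List.eq_nil_of_length_eq_zero h3
    subst hstack
    simp only [dfsB]
    exact dfs_final n dic0 a u v hlen_a hsym0 hkr0 hvu hv0 hvn seen s hInv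
  | succ fuel ih =>
    intro seen stack s hInv hfuel
    match stack with
    | [] =>
      simp only [dfsB]
      exact dfs_final n dic0 a u v hlen_a hsym0 hkr0 hvu hv0 hvn seen s hInv
    | x :: rest =>
      obtain ⟨hlen, hndstack, hstackmem, hsv, hsu, hsound, hacc, hclosed⟩ := hInv
      obtain ⟨hx0, hxn, hsx, hxu⟩ := hstackmem x List.mem_cons_self
      have hnbrs_eq : (PySem.List.pyGet? adj x).getD [] = dic0.getD x [] := hadj x hx0 hxn
      have hnbrs_nodup : (dic0.getD x []).Nodup :=
        List.nodup_iff_count_le_one.mpr (fun y => hsimple0 x y)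
      obtain ⟨hp1, hp2, hp3, hp4⟩ := pushNbrs_spec n (dic0.getD x []) hnbrs_nodup
        (entries_range x) seen [] hlen
      set news := (dic0.getD x []).filter (fun y => !(seenAt seen y)) with hnews
      have hp2' : (pushNbrs (dic0.getD x []) (seen, [])).2 = news := by
        rw [hp2]; rfl
      have hnews_mem : ∀ z : Int, z ∈ news ↔ z ∈ dic0.getD x [] ∧ seenAt seen z = false := by
        intro z
        rw [hnews, List.mem_filter]
        constructor
        · rintro ⟨h1, h2⟩
          simp at h2
          exact ⟨h1, h2⟩
        · rintro ⟨h1, h2⟩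
          refine ⟨h1, by rw [h2]; rfl⟩
      have hreach_x : Reach dic0 (fun z => z ≠ u) v x :=
        (hsound x hx0 hxn hsx).resolve_left hxu
      have hunfold : dfsB (fuel + 1) adj a seen (x :: rest) s
          = dfsB fuel adj a (pushNbrs (dic0.getD x []) (seen, [])).1
              ((pushNbrs (dic0.getD x []) (seen, [])).2.reverse ++ rest)
              (s + listGet a x) := by
        simp only [dfsB]
        rw [hnbrs_eq]
        rfl
      rw [hunfold, hp2']
      set seen' := (pushNbrs (dic0.getD x []) (seen, [])).1 with hseen'
      have hmono : ∀ z : Int, 0 ≤ z → seenAt seen z = true → seenAt seen' z = true := by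
        intro z hz0 hz
        rw [hseen', hp3 z hz0, hz]
        simp
      have hseen'_char : ∀ z : Int, 0 ≤ z →
          (seenAt seen' z = true ↔ (seenAt seen z = true ∨ z ∈ dic0.getD x [])) := by
        intro z hz0
        rw [hseen', hp3 z hz0]
        simp
      have hnd_news : news.Nodup := List.Nodup.filter _ hnbrs_nodup
      have hdisj : ∀ z ∈ news, z ∉ rest := by
        intro z hz hzr
        have h1 := ((hnews_mem z).mp hz).2
        have h2 := (hstackmem z (List.mem_cons_of_mem _ hzr)).2.2.1
        rw [h1] at h2
        cases h2
      have hxnotin : x ∉ news.reverse ++ rest := by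
        intro hmem
        rcases List.mem_append.mp hmem with h | h
        · have h2 := ((hnews_mem x).mp (List.mem_reverse.mp h)).2
          rw [hsx] at h2
          cases h2
        · exact (List.nodup_cons.mp hndstack).1 h
      have hinv' : DfsInv n dic0 a u v seen' (news.reverse ++ rest) (s + listGet a x) := by
        refine ⟨hp1, ?_, ?_, hmono v hv0 hsv, hmono u hu0 hsu, ?_, ?_, ?_⟩
        · rw [List.nodup_append]
          refine ⟨List.nodup_reverse.mpr hnd_news, (List.nodup_cons.mp hndstack).2, ?_⟩
          intro z hz b hb heq
          exact hdisj z (List.mem_reverse.mp hz) (heq ▸ hb)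
        · intro z hz
          rcases List.mem_append.mp hz with h | h
          · have hzn := List.mem_reverse.mp h
            obtain ⟨hz1, hz2⟩ := (hnews_mem z).mp hzn
            obtain ⟨hz0, hzn'⟩ := entries_range x z hz1
            refine ⟨hz0, hzn', (hseen'_char z hz0).mpr (Or.inr hz1), ?_⟩
            intro hzu
            rw [hzu, hsu] at hz2
            cases hz2
          · obtain ⟨hz0, hzn', hzs, hzu⟩ := hstackmem z (List.mem_cons_of_mem _ h)
            exact ⟨hz0, hzn', hmono z hz0 hzs, hzu⟩
        · -- soundness
          intro z hz0 hzn hz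
          rcases (hseen'_char z hz0).mp hz with h | h
          · exact hsound z hz0 hzn h
          · by_cases hzu : z = u
            · exact Or.inl hzu
            · exact Or.inr (hreach_x.snoc h hzu)
        · -- the accumulator
          have hxm : x ∈ intRange n := mem_intRange.mpr ⟨hx0, hxn⟩
          rw [← Finset.sum_erase_add _ _ hxm]
          have hterm : ind (seenAt seen' x = true ∧ x ≠ u ∧ x ∉ news.reverse ++ rest)
              (listGet a x) = listGet a x :=
            ind_pos ⟨(hseen'_char x hx0).mpr (Or.inl hsx), hxu, hxnotin⟩
          have hcongr : ∀ x' ∈ (intRange n).erase x,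
              ind (seenAt seen' x' = true ∧ x' ≠ u ∧ x' ∉ news.reverse ++ rest) (listGet a x')
              = ind (seenAt seen x' = true ∧ x' ≠ u ∧ x' ∉ x :: rest) (listGet a x') := by
            intro x' hx'
            have hx'ne : x' ≠ x := (Finset.mem_erase.mp hx').1
            have hx'0 : 0 ≤ x' := (mem_intRange.mp (Finset.mem_erase.mp hx').2).1
            refine ind_congr ?_ rfl
            constructor
            · rintro ⟨h1, h2, h3⟩
              by_cases hs' : seenAt seen x' = true
              · refine ⟨hs', h2, ?_⟩
                intro hm
                rcases List.mem_cons.mp hm with h' | h'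
                · exact hx'ne h'
                · exact h3 (List.mem_append_right _ h')
              · exfalso
                have h4 : x' ∈ dic0.getD x [] :=
                  ((hseen'_char x' hx'0).mp h1).resolve_left hs'
                have h5 : x' ∈ news := (hnews_mem x').mpr
                  ⟨h4, by rcases hb : seenAt seen x' with _ | _
                          · rfl
                          · exact absurd hb hs'⟩
                exact h3 (List.mem_append_left _ (List.mem_reverse.mpr h5))
            · rintro ⟨h1, h2, h3⟩
              refine ⟨hmono x' hx'0 h1, h2, ?_⟩
              intro hm
              rcases List.mem_append.mp hm with h' | h'
              · have h4 := ((hnews_mem x').mp (List.mem_reverse.mp h')).2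
                rw [h1] at h4
                cases h4
              · exact h3 (List.mem_cons_of_mem _ h')
          rw [Finset.sum_congr rfl hcongr, hterm]
          have hx_old : ind (seenAt seen x = true ∧ x ≠ u ∧ x ∉ x :: rest) (listGet a x) = 0 :=
            ind_neg (fun h => h.2.2 List.mem_cons_self)
          rw [hacc, ← Finset.sum_erase_add _ _ hxm, hx_old]
          ring
        · -- closedness
          intro z hz0 hzn hz hzu hznot y hy
          by_cases hzx : z = x
          · rw [hzx] at hy
            exact (hseen'_char y (entries_range x y hy).1).mpr (Or.inr hy)
          · by_cases hseenz : seenAt seen z = true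
            · have hznotrest : z ∉ rest := fun hr => hznot (List.mem_append_right _ hr)
              have hznot' : z ∉ x :: rest := by
                intro hm
                rcases List.mem_cons.mp hm with h' | h'
                · exact hzx h'
                · exact hznotrest h'
              exact hmono y (entries_range z y hy).1 (hclosed z hz0 hzn hseenz hzu hznot' y hy)
            · exfalso
              have h4 : z ∈ dic0.getD x [] :=
                ((hseen'_char z hz0).mp hz).resolve_left hseenz
              have h5 : z ∈ news := (hnews_mem z).mpr
                ⟨h4, by rcases hb : seenAt seen z with _ | _
                        · rfl
                        · exact absurd hb hseenz⟩
              exact hznot (List.mem_append_left _ (List.mem_reverse.mpr h5))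
      refine ih seen' (news.reverse ++ rest) (s + listGet a x) hinv' ?_
      have hcount : seen'.count false + news.length = seen.count false := by
        rw [hseen']
        rw [hp4]
      have hlenstack : (news.reverse ++ rest).length = news.length + rest.length := by
        rw [List.length_append, List.length_reverse]
      simp only [List.length_cons] at hfuel
      rw [hlenstack]
      push_cast
      push_cast at hfuel
      omega

theorem seenAt_replicate (n : Nat) (x : Int) (h0 : 0 ≤ x) (hn : x < (n : Int)) :
    seenAt (List.replicate n false) x = false := by
  rw [seenAt_eq_pyGetD]
  have hx : x = ((x.toNat : Nat) : Int) := by omega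
  rw [hx, PySem.List.pyGetD_natCast, List.getD_eq_getElem?_getD, List.getElem?_replicate,
      if_pos (by omega)]
  rfl

theorem dfs_init (n : Nat) (dic0 : PySem.Dict Int (List Int)) (a : List Int) (u v : Int)
    (hu0 : 0 ≤ u) (hun : u < (n : Int)) (hv0 : 0 ≤ v) (hvn : v < (n : Int)) (hvu : v ≠ u) :
    DfsInv n dic0 a u v
      (PySem.List.pySetD (PySem.List.pySetD (List.replicate n false) u true) v true) [v] 0 := by
  set seen1 := PySem.List.pySetD (List.replicate n false) u true with hseen1
  set seen0 := PySem.List.pySetD seen1 v true with hseen0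
  have hlen1 : seen1.length = n := by
    rw [hseen1, PySem.List.length_pySetD, List.length_replicate]
  have hlen0 : seen0.length = n := by
    rw [hseen0, PySem.List.length_pySetD, hlen1]
  have hchar : ∀ z : Int, 0 ≤ z → z < (n : Int) →
      seenAt seen0 z = (decide (z = u) || decide (z = v)) := by
    intro z hz0 hzn
    by_cases hzv : z = v
    · rw [hzv, hseen0, seenAt_set_self seen1 v hv0 (by rw [hlen1]; exact hvn)]
      simp
    · rw [hseen0, seenAt_set_ne seen1 v z hv0 (by rw [hlen1]; exact hvn) hz0 hzv]
      by_cases hzu : z = u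
      · rw [hzu, hseen1, seenAt_set_self _ u hu0 (by rw [List.length_replicate]; exact hun)]
        simp
      · rw [hseen1, seenAt_set_ne _ u z hu0 (by rw [List.length_replicate]; exact hun) hz0 hzu]
        rw [seenAt_replicate n z hz0 hzn]
        simp [hzu, hzv]
  refine ⟨hlen0, List.nodup_singleton v, ?_, ?_, ?_, ?_, ?_, ?_⟩
  · intro z hz
    have hzv : z = v := by simpa using hz
    rw [hzv]
    refine ⟨hv0, hvn, ?_, hvu⟩
    rw [hchar v hv0 hvn]
    simp
  · rw [hchar v hv0 hvn]
    simp
  · rw [hchar u hu0 hun]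
    simp
  · intro z hz0 hzn hz
    rw [hchar z hz0 hzn] at hz
    simp at hz
    rcases hz with hz | hz
    · exact Or.inl hz
    · rw [hz]
      exact Or.inr Reach.refl
  · refine (Finset.sum_eq_zero ?_).symm
    intro z hzm
    obtain ⟨hz0, hzn⟩ := mem_intRange.mp hzm
    refine ind_neg ?_
    rintro ⟨h1, h2, h3⟩
    rw [hchar z hz0 hzn] at h1
    simp at h1
    rcases h1 with h1 | h1
    · exact h2 h1
    · exact h3 (by rw [h1]; exact List.mem_cons_self)
  · intro z hz0 hzn hz hzu hznot
    exfalso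
    rw [hchar z hz0 hzn] at hz
    simp at hz
    rcases hz with hz | hz
    · exact hzu hz
    · exact hznot (by rw [hz]; exact List.mem_cons_self)

-- 2 × A's answer is the potential of the initial state
theorem solution_phi (a : List Int) (edges : List (List Int))
    (hsum : a.sum = 0)
    (hE : edges.length + 1 = a.length)
    (hedge : ∀ e ∈ edges, e.length = 2 ∧ 0 ≤ pvE0 e ∧ pvE0 e < (a.length : Int) ∧
       0 ≤ pvE1 e ∧ pvE1 e < (a.length : Int) ∧ pvE0 e ≠ pvE1 e)
    (hndc : (edges.map (fun e => if pvE0 e ≤ pvE1 e then (pvE0 e, pvE1 e) else (pvE1 e, pvE0 e))).Nodup)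
    (hreach : ∀ v ∈ List.range a.length, (v : Int) ∈ reachClose edges edges.length) :
    2 * solution a edges = phi (buildA edges) a := by
  unfold solution
  rw [if_neg (by omega)]
  have hInv := initial_invA a edges hsum hE hedge hndc hreach
  have hbound : ((((buildA edges).keys.filter
        (fun d => ((buildA edges).getD d []).length == 1)).length : Nat) : Int)
      + E2 (buildA edges)
      ≤ ((((buildA edges).keys.filter
        (fun d => ((buildA edges).getD d []).length == 1)).length + 2 * edges.length : Nat) : Int) := by
    rw [build_E2]
    push_cast
    omega
  have h := loopA_phi _ (buildA edges) a _ 0 a.length hInv hbound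
  rw [h]
  ring

theorem DSum_empty (g : Int → Int → Int) : DSum (PySem.Dict.empty : PySem.Dict Int (List Int)) g = 0 := rfl

theorem phi_regroup (a : List Int) (edges : List (List Int))
    (hsum : a.sum = 0)
    (hE : edges.length + 1 = a.length)
    (hedge : ∀ e ∈ edges, e.length = 2 ∧ 0 ≤ pvE0 e ∧ pvE0 e < (a.length : Int) ∧
       0 ≤ pvE1 e ∧ pvE1 e < (a.length : Int) ∧ pvE0 e ≠ pvE1 e)
    (hndc : (edges.map (fun e => if pvE0 e ≤ pvE1 e then (pvE0 e, pvE1 e) else (pvE1 e, pvE0 e))).Nodup)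
    (hreach : ∀ v ∈ List.range a.length, (v : Int) ∈ reachClose edges edges.length) :
    phi (buildA edges) a
      = 2 * (edges.map (fun e => |sideSum (buildA edges) (pvE0 e) (pvE1 e) a|)).sum := by
  have hInv := initial_invA a edges hsum hE hedge hndc hreach
  have hphiD : phi (buildA edges) a
      = DSum (buildA edges) (fun u v => |sideSum (buildA edges) u v a|) := rfl
  rw [hphiD, buildA_eq, build_DSum edges _ PySem.Dict.empty (by
    have : (PySem.Dict.empty : PySem.Dict Int (List Int)).keys = [] := rfl
    rw [this]; exact List.nodup_nil), DSum_empty, ← buildA_eq]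
  have hsym_edges : ∀ e ∈ edges,
      |sideSum (buildA edges) (pvE0 e) (pvE1 e) a| + |sideSum (buildA edges) (pvE1 e) (pvE0 e) a|
        = 2 * |sideSum (buildA edges) (pvE0 e) (pvE1 e) a| := by
    intro e he
    have hbound : ((((buildA edges).keys.filter
          (fun d => ((buildA edges).getD d []).length == 1)).length : Nat) : Int)
        + E2 (buildA edges)
        ≤ ((((buildA edges).keys.filter
          (fun d => ((buildA edges).getD d []).length == 1)).length + 2 * edges.length : Nat) : Int) := by
      rw [build_E2]
      push_cast
      omega
    have h := loopA_sym _ (buildA edges) a _ a.length hInv hbound (pvE0 e) (pvE1 e)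
      (adj_of_edge edges e he)
    omega
  rw [List.map_congr_left hsym_edges, zero_add]
  have hdouble : ∀ (l : List (List Int)) (f : List Int → Int),
      (l.map (fun e => 2 * f e)).sum = 2 * (l.map f).sum := by
    intro l f
    induction l with
    | nil => simp
    | cons e t ih =>
      simp only [List.map_cons, List.sum_cons, ih]
      ring
  exact hdouble edges _

theorem solution_alt_side (a : List Int) (edges : List (List Int))
    (hsum : a.sum = 0)
    (hE : edges.length + 1 = a.length)
    (hedge : ∀ e ∈ edges, e.length = 2 ∧ 0 ≤ pvE0 e ∧ pvE0 e < (a.length : Int) ∧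
       0 ≤ pvE1 e ∧ pvE1 e < (a.length : Int) ∧ pvE0 e ≠ pvE1 e)
    (hndc : (edges.map (fun e => if pvE0 e ≤ pvE1 e then (pvE0 e, pvE1 e) else (pvE1 e, pvE0 e))).Nodup)
    (hreach : ∀ v ∈ List.range a.length, (v : Int) ∈ reachClose edges edges.length) :
    solution_alt a edges
      = (edges.map (fun e => |sideSum (buildA edges) (pvE0 e) (pvE1 e) a|)).sum := by
  unfold solution_alt
  rw [if_neg (by omega)]
  have hInv := initial_invA a edges hsum hE hedge hndc hreach
  obtain ⟨_, hnd0, hkr0, hsym0, hsimple0, hnoself0, hconn0, hzsum0, hcnt0, hq0⟩ := hInv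
  have hfold := PySem.List.foldl_add edges (fun e =>
    |dfsB (2 * a.length + 1) (buildAdjB a.length edges) a
      (PySem.List.pySetD (PySem.List.pySetD (List.replicate a.length false)
        ((PySem.List.pyGet? e 0).getD 0) true) ((PySem.List.pyGet? e 1).getD 0) true)
      [(PySem.List.pyGet? e 1).getD 0] 0|) 0
  rw [show (edges.foldl (fun total e =>
      let u := (PySem.List.pyGet? e 0).getD 0
      let v := (PySem.List.pyGet? e 1).getD 0
      let seen := PySem.List.pySetD (PySem.List.pySetD (List.replicate a.length false) u true) v true
      total + |dfsB (2 * a.length + 1) (buildAdjB a.length edges) a seen [v] 0|) 0)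
    = edges.foldl (fun acc e => acc + (fun e =>
        |dfsB (2 * a.length + 1) (buildAdjB a.length edges) a
          (PySem.List.pySetD (PySem.List.pySetD (List.replicate a.length false)
            ((PySem.List.pyGet? e 0).getD 0) true) ((PySem.List.pyGet? e 1).getD 0) true)
          [(PySem.List.pyGet? e 1).getD 0] 0|) e) 0 from rfl]
  rw [hfold]
  rw [zero_add]
  refine congrArg List.sum (List.map_congr_left ?_)
  intro e he
  obtain ⟨_, h0, h1, h2, h3, h4⟩ := hedge e he
  have hvu : pvE1 e ≠ pvE0 e := Ne.symm h4
  have hrun := dfs_run a.length (buildA edges) (buildAdjB a.length edges) a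
    (pvE0 e) (pvE1 e) rfl
    (adjB_rel a.length edges (fun e' he' => by
      obtain ⟨_, g0, g1, g2, g3, _⟩ := hedge e' he'
      exact ⟨g0, g1, g2, g3⟩))
    hsym0 hsimple0 hkr0 hvu h2 h3 h0
    (2 * a.length + 1)
    (PySem.List.pySetD (PySem.List.pySetD (List.replicate a.length false) (pvE0 e) true)
      (pvE1 e) true)
    [pvE1 e] 0
    (dfs_init a.length (buildA edges) a (pvE0 e) (pvE1 e) h0 h1 h2 h3 hvu)
    (by
      have hc : (PySem.List.pySetD (PySem.List.pySetD (List.replicate a.length false)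
          (pvE0 e) true) (pvE1 e) true).count false
          ≤ (PySem.List.pySetD (PySem.List.pySetD (List.replicate a.length false)
            (pvE0 e) true) (pvE1 e) true).length := List.count_le_length
      have hl : (PySem.List.pySetD (PySem.List.pySetD (List.replicate a.length false)
          (pvE0 e) true) (pvE1 e) true).length = a.length := by
        rw [PySem.List.length_pySetD, PySem.List.length_pySetD, List.length_replicate]
      rw [hl] at hc
      simp only [List.length_cons, List.length_nil]
      push_cast
      omega)
  exact congrArg (fun z => |z|) hrun

-- ===== VERDICT (by name: the statement is the Claim_ definition above) =====
theorem solution_spec : Claim_equal_solution := by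
  intro a edges _ hPre
  unfold Spec_solution
  by_cases hs : a.sum = 0
  · rcases hPre with hP | ⟨hE, hedge, hndc, hreach⟩
    · exact absurd hs hP
    · have hA := solution_phi a edges hs hE hedge hndc hreach
      have hR := phi_regroup a edges hs hE hedge hndc hreach
      have hB := solution_alt_side a edges hs hE hedge hndc hreach
      omega
  · unfold solution solution_alt
    rw [if_pos hs, if_pos hs]
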